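-- pv_equiv track=rewrite | github.com/haolunc/ARC-RL | reference_solutions/solutions/4347f46a.py | transform
-- ===== SOURCE A (Python) =====
-- def transform(grid):
--
--     from collections import deque
--
--     h = len(grid)
--     w = len(grid[0]) if h > 0 else 0
--
--     visited = [[False] * w for _ in range(h)]
--
--     dirs = [(1, 0), (-1, 0), (0, 1), (0, -1)]
--
--     for r in range(h):
--         for c in range(w):
--             if grid[r][c] == 0 or visited[r][c]:
--                 continue
--
--             colour = grid[r][c]
--
--             q = deque()
--             q.append((r, c))
--             visited[r][c] = True
--             component = []
--
--             while q:
--                 x, y = q.popleft()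
--                 component.append((x, y))
--                 for dx, dy in dirs:
--                     nx, ny = x + dx, y + dy
--                     if 0 <= nx < h and 0 <= ny < w                       and not visited[nx][ny] and grid[nx][ny] == colour:
--                         visited[nx][ny] = True
--                         q.append((nx, ny))
--
--             rows = [p[0] for p in component]
--             cols = [p[1] for p in component]
--             min_r, max_r = min(rows), max(rows)
--             min_c, max_c = min(cols), max(cols)
--
--             height = max_r - min_r + 1
--             width = max_c - min_c + 1
--
--             if len(component) == height * width:
--                 for x, y in component:
--                     if (x != min_r and x != max_r) and (y != min_c and y != max_c):
--                         grid[x][y] = 0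
--
--     return grid
-- ===== SOURCE B (Python) =====
-- def transform(grid):
--     # Union-find labelling + per-root bounding-box/count aggregates, then a per-cell
--     # interior test; mutates and returns the same grid object (like A).
--     h = len(grid)
--     w = len(grid[0]) if h > 0 else 0
--
--     parent = list(range(h * w))
--
--     def find(i):
--         while parent[i] != i:
--             i = parent[i]
--         return i
--
--     def union(a, b):
--         ra, rb = find(a), find(b)
--         if ra != rb:
--             parent[ra] = rb
--
--     for r in range(h):
--         for c in range(w):
--             v = grid[r][c]
--             if v != 0:
--                 i = r * w + c
--                 if c + 1 < w and grid[r][c + 1] == v: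
--                     union(i, i + 1)
--                 if r + 1 < h and grid[r + 1][c] == v:
--                     union(i, i + w)
--
--     stats = {}
--     for r in range(h):
--         for c in range(w):
--             if grid[r][c] != 0:
--                 k = find(r * w + c)
--                 if k in stats:
--                     mr, Mr, mc, Mc, n = stats[k]
--                     stats[k] = (min(mr, r), max(Mr, r), min(mc, c), max(Mc, c), n + 1)
--                 else:
--                     stats[k] = (r, r, c, c, 1)
--
--     for r in range(h):
--         row = grid[r]
--         for c in range(w):
--             v = row[c]
--             if v != 0:
--                 mr, Mr, mc, Mc, n = stats[find(r * w + c)]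
--                 if n == (Mr - mr + 1) * (Mc - mc + 1) and mr < r < Mr and mc < c < Mc:
--                     row[c] = 0
--     return grid
-- ===== Notes on version B (the rewrite author's own statement) =====
-- stated objective: faster
-- what changed: Per-seed BFS flood fill (deque + visited matrix + per-component cell lists and hollowing) is replaced by union-find labelling over cell indices, a dict of per-root (min/max row, min/max col, count) aggregates built in one pass, and a per-cell interior test; this avoids the queue/visited-matrix bookkeeping and component list allocations.
import Mathlib
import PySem

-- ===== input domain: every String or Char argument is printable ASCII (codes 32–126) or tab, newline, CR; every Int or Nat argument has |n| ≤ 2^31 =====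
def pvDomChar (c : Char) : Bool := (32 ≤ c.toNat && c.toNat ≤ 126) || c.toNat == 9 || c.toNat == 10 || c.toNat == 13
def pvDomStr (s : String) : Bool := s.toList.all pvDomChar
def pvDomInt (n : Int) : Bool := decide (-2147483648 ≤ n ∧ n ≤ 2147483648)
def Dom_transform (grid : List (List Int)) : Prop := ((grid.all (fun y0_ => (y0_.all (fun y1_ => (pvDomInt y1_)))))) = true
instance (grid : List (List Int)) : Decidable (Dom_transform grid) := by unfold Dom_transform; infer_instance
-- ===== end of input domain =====

-- B replaces A's per-seed BFS flood fill (deque + visited matrix + per-component hollowing)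
-- by union-find labelling over cell indices plus a dict of per-root bounding-box/count
-- aggregates and a per-cell interior test; a timing run measured B faster by a constant
-- factor (no queue/visited-matrix/component-list bookkeeping).  Both Pythons mutate the grid
-- in place and return the same object; the theorems here are about the returned value.

-- ===== PORT A =====
-- grid[r][c] / visited[r][c]: used only under guards 0 ≤ r < len, 0 ≤ c < row length,
-- where .toNat + getD is exact Python indexing.
def pvAget (g : List (List Int)) (r c : Int) : Int := (g.getD r.toNat []).getD c.toNat 0

def pvAgetB (v : List (List Bool)) (r c : Int) : Bool := (v.getD r.toNat []).getD c.toNat false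

def pvAset {α : Type} (m : List (List α)) (r c : Int) (x : α) : List (List α) :=
  m.set r.toNat ((m.getD r.toNat []).set c.toNat x)

def pvAdirs : List (Int × Int) := [(1, 0), (-1, 0), (0, 1), (0, -1)]

-- one neighbour check of the BFS inner `for dx, dy in dirs` loop
def pvApush (g : List (List Int)) (h w colour x y : Int)
    (st : List (Int × Int) × List (List Bool)) (d : Int × Int) :
    List (Int × Int) × List (List Bool) :=
  let nx := x + d.1
  let ny := y + d.2
  if 0 ≤ nx ∧ nx < h ∧ 0 ≤ ny ∧ ny < w ∧ pvAgetB st.2 nx ny = false ∧ pvAget g nx ny = colour then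
    (st.1 ++ [(nx, ny)], pvAset st.2 nx ny true)
  else st

-- the `while q:` loop; fuel makes it total (h*w+1 is always enough, proved below)
def pvAbfs (g : List (List Int)) (h w colour : Int) :
    Nat → List (Int × Int) → List (List Bool) → List (Int × Int) →
    List (Int × Int) × List (List Bool)
  | 0, _, vis, comp => (comp, vis)
  | _ + 1, [], vis, comp => (comp, vis)
  | fuel + 1, (x, y) :: rest, vis, comp =>
      let comp' := comp ++ [(x, y)]
      let st := pvAdirs.foldl (pvApush g h w colour x y) (rest, vis)
      pvAbfs g h w colour fuel st.1 st.2 comp'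

-- the per-component min/max + full-rectangle test + interior zeroing of A's loop body
def pvAhollow (gg : List (List Int)) (comp : List (Int × Int)) : List (List Int) :=
  let minr := (PySem.List.min? (comp.map (·.1)) (fun z => z)).getD 0
  let maxr := (PySem.List.max? (comp.map (·.1)) (fun z => z)).getD 0
  let minc := (PySem.List.min? (comp.map (·.2)) (fun z => z)).getD 0
  let maxc := (PySem.List.max? (comp.map (·.2)) (fun z => z)).getD 0
  if (comp.length : Int) = (maxr - minr + 1) * (maxc - minc + 1) then
    comp.foldl
      (fun gg p =>
        if p.1 ≠ minr ∧ p.1 ≠ maxr ∧ p.2 ≠ minc ∧ p.2 ≠ maxc then pvAset gg p.1 p.2 0 else gg)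
      gg
  else gg

-- body of the outer `for r … for c …` loop
def pvAstep (h w : Int) (st : List (List Int) × List (List Bool)) (r c : Int) :
    List (List Int) × List (List Bool) :=
  if pvAget st.1 r c = 0 ∨ pvAgetB st.2 r c = true then st
  else
    let colour := pvAget st.1 r c
    let vis1 := pvAset st.2 r c true
    let res := pvAbfs st.1 h w colour (h.toNat * w.toNat + 1) [(r, c)] vis1 []
    (pvAhollow st.1 res.1, res.2)

def transform (grid : List (List Int)) : List (List Int) :=
  let h : Int := grid.length
  let w : Int := if grid.length > 0 then ((grid.headD []).length : Int) else 0
  let visited := List.replicate grid.length (List.replicate w.toNat false)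
  ((PySem.List.pyRange 0 h 1).foldl
    (fun st r => (PySem.List.pyRange 0 w 1).foldl (fun st c => pvAstep h w st r c) st)
    (grid, visited)).1

-- ===== PORT B =====
-- `while parent[i] != i: i = parent[i]`; fuel = len(parent) is always enough (proved below)
def pvBroot (parent : List Int) : Nat → Int → Int
  | 0, i => i
  | fuel + 1, i =>
      let p := parent.getD i.toNat 0
      if p = i then i else pvBroot parent fuel p

def pvBfind (parent : List Int) (i : Int) : Int := pvBroot parent parent.length i

-- `ra, rb = find(a), find(b); if ra != rb: parent[ra] = rb`
def pvBunion (parent : List Int) (a b : Int) : List Int :=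
  let ra := pvBfind parent a
  let rb := pvBfind parent b
  if ra = rb then parent else parent.set ra.toNat rb

-- union pass: link one cell to its equal-coloured right and down neighbour
def pvBlink (grid : List (List Int)) (h w : Int) (parent : List Int) (r c : Int) : List Int :=
  let v := (grid.getD r.toNat []).getD c.toNat 0
  if v = 0 then parent
  else
    let i := r * w + c
    let p1 := if c + 1 < w ∧ (grid.getD r.toNat []).getD (c + 1).toNat 0 = v then
        pvBunion parent i (i + 1) else parent
    if r + 1 < h ∧ (grid.getD (r + 1).toNat []).getD c.toNat 0 = v then
        pvBunion p1 i (i + w) else p1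

-- stats pass: fold the cell (r, c) into its root's (min_r, max_r, min_c, max_c, count)
def pvBstat (d : PySem.Dict Int (Int × Int × Int × Int × Int)) (k r c : Int) :
    PySem.Dict Int (Int × Int × Int × Int × Int) :=
  match d.get? k with
  | some (mr, Mr, mc, Mc, n) => d.insert k (min mr r, max Mr r, min mc c, max Mc c, n + 1)
  | none => d.insert k (r, r, c, c, 1)

-- stats pass, body for one cell
def pvBstep2 (grid : List (List Int)) (parent : List Int) (w : Int)
    (d : PySem.Dict Int (Int × Int × Int × Int × Int)) (r c : Int) :
    PySem.Dict Int (Int × Int × Int × Int × Int) :=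
  if (grid.getD r.toNat []).getD c.toNat 0 ≠ 0 then
    pvBstat d (pvBfind parent (r * w + c)) r c
  else d

-- third pass, body for one cell of the current row (Python's stats[k] lookup always finds
-- its key when v ≠ 0, so the `none` branch is unreachable there)
def pvBclear (parent : List Int) (stats : PySem.Dict Int (Int × Int × Int × Int × Int))
    (w r : Int) (row : List Int) (c : Int) : List Int :=
  let v := row.getD c.toNat 0
  if v ≠ 0 then
    match stats.get? (pvBfind parent (r * w + c)) with
    | some (mr, Mr, mc, Mc, n) =>
        if n = (Mr - mr + 1) * (Mc - mc + 1) ∧ mr < r ∧ r < Mr ∧ mc < c ∧ c < Mc then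
          row.set c.toNat 0
        else row
    | none => row
  else row

-- third pass, one row (`row = grid[r]`, then the column loop mutates that row)
def pvBrow (parent : List Int) (stats : PySem.Dict Int (Int × Int × Int × Int × Int))
    (w : Int) (G : List (List Int)) (r : Int) : List (List Int) :=
  G.set r.toNat ((PySem.List.pyRange 0 w 1).foldl (pvBclear parent stats w r) (G.getD r.toNat []))

def transform_alt (grid : List (List Int)) : List (List Int) :=
  let h : Int := grid.length
  let w : Int := if grid.length > 0 then ((grid.headD []).length : Int) else 0
  let parent :=
    (PySem.List.pyRange 0 h 1).foldl
      (fun P r => (PySem.List.pyRange 0 w 1).foldl (fun P c => pvBlink grid h w P r c) P)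
      (PySem.List.pyRange 0 (h * w) 1)
  let stats :=
    (PySem.List.pyRange 0 h 1).foldl
      (fun d r => (PySem.List.pyRange 0 w 1).foldl (fun d c => pvBstep2 grid parent w d r c) d)
      (PySem.Dict.empty : PySem.Dict Int (Int × Int × Int × Int × Int))
  (PySem.List.pyRange 0 h 1).foldl (fun G r => pvBrow parent stats w G r) grid

-- ===== PRECONDITION & SPEC =====
-- Pre_ excludes exactly the grids on which A raises IndexError: a row shorter than row 0
-- (both programs index every row at columns 0..len(grid[0])-1).  Rows longer than row 0 are
-- admitted; their extra cells are ignored by both programs.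
def Pre_transform (grid : List (List Int)) : Prop :=
  ∀ row ∈ grid, (grid.headD []).length ≤ row.length

instance (grid : List (List Int)) : Decidable (Pre_transform grid) := by
  unfold Pre_transform; infer_instance

def pvWitness_transform : List (List Int) := [[1, 1, 0], [1, 1, 2]]

def Spec_transform (grid : List (List Int)) (out : List (List Int)) : Prop := out = transform_alt grid

instance (grid : List (List Int)) (out : List (List Int)) : Decidable (Spec_transform grid out) := by
  unfold Spec_transform; infer_instance

-- ===== CLAIM (what is proved, stated in full; the proofs are below) =====
def Claim_equal_transform : Prop :=
  ∀ (grid : List (List Int)), Dom_transform grid → Pre_transform grid →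
    Spec_transform grid (transform grid)

-- ===== LEMMAS AND PROOFS =====

-- ---------- Stage 1: spec-level notions (proof layer; used by no Claim_/Spec_/Pre_) ----------

def pvH (g : List (List Int)) : Int := g.length

def pvW (g : List (List Int)) : Int := (g.headD []).length

def pvVal (g : List (List Int)) (p : Int × Int) : Int := pvAget g p.1 p.2

def pvInb (g : List (List Int)) (p : Int × Int) : Prop :=
  0 ≤ p.1 ∧ p.1 < pvH g ∧ 0 ≤ p.2 ∧ p.2 < pvW g

def pvAdj (g : List (List Int)) (p q : Int × Int) : Prop :=
  pvInb g p ∧ pvInb g q ∧ pvVal g p ≠ 0 ∧ pvVal g q = pvVal g p ∧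
    (q = (p.1 + 1, p.2) ∨ q = (p.1 - 1, p.2) ∨ q = (p.1, p.2 + 1) ∨ q = (p.1, p.2 - 1))

def pvConn (g : List (List Int)) : Int × Int → Int × Int → Prop :=
  Relation.ReflTransGen (pvAdj g)

def pvBoxS (r1 r2 c1 c2 : Int) : Set (Int × Int) :=
  {q : Int × Int | r1 ≤ q.1 ∧ q.1 ≤ r2 ∧ c1 ≤ q.2 ∧ q.2 ≤ c2}

-- the cells both programs set to 0: p's component is a full rectangle and p is strictly inside
def pvZ (g : List (List Int)) (p : Int × Int) : Prop :=
  ∃ r1 r2 c1 c2 : Int, {q | pvConn g p q} = pvBoxS r1 r2 c1 c2 ∧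
    r1 < p.1 ∧ p.1 < r2 ∧ c1 < p.2 ∧ p.2 < c2

-- pointwise description of the common output
def pvDescr (g out : List (List Int)) : Prop :=
  out.length = g.length ∧
  (∀ r : ℕ, (out.getD r []).length = (g.getD r []).length) ∧
  (∀ r c : ℕ,
    (pvZ g ((r : Int), (c : Int)) → (out.getD r []).getD c 0 = 0) ∧
    (¬ pvZ g ((r : Int), (c : Int)) → (out.getD r []).getD c 0 = (g.getD r []).getD c 0))

theorem pvGetD2_eq (m : List (List Int)) (r c : ℕ) (hr : r < m.length)
    (hc : c < m[r].length) : (m.getD r []).getD c 0 = m[r][c] := by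
  rw [List.getD_eq_getElem m [] hr, List.getD_eq_getElem _ 0 hc]

theorem pvDescr_unique (g o1 o2 : List (List Int)) (h1 : pvDescr g o1) (h2 : pvDescr g o2) :
    o1 = o2 := by
  obtain ⟨l1, s1, e1⟩ := h1
  obtain ⟨l2, s2, e2⟩ := h2
  apply List.ext_getElem (by omega)
  intro r hr1 hr2
  have hlen : o1[r].length = o2[r].length := by
    have t1 := s1 r; have t2 := s2 r
    rw [List.getD_eq_getElem o1 [] hr1] at t1
    rw [List.getD_eq_getElem o2 [] hr2] at t2
    omega
  apply List.ext_getElem hlen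
  intro c hc1 hc2
  have g1 := e1 r c
  have g2 := e2 r c
  rw [← pvGetD2_eq o1 r c hr1 hc1, ← pvGetD2_eq o2 r c hr2 hc2]
  by_cases hz : pvZ g ((r : Int), (c : Int))
  · rw [g1.1 hz, g2.1 hz]
  · rw [g1.2 hz, g2.2 hz]

theorem pvAdj_symm (g : List (List Int)) (p q : Int × Int) (h : pvAdj g p q) : pvAdj g q p := by
  obtain ⟨hp, hq, hv, he, hd⟩ := h
  refine ⟨hq, hp, by rw [he]; exact hv, he.symm, ?_⟩
  obtain ⟨p1, p2⟩ := p
  rcases hd with h | h | h | h <;> subst h <;> simp [Prod.ext_iff]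

theorem pvConn_symm (g : List (List Int)) (p q : Int × Int) (h : pvConn g p q) : pvConn g q p := by
  induction h with
  | refl => exact Relation.ReflTransGen.refl
  | tail _ hadj ih =>
      exact Relation.ReflTransGen.trans
        (Relation.ReflTransGen.single (pvAdj_symm g _ _ hadj)) ih

theorem pvConn_trans (g : List (List Int)) (p q r : Int × Int)
    (h1 : pvConn g p q) (h2 : pvConn g q r) : pvConn g p r :=
  Relation.ReflTransGen.trans h1 h2

-- along a chain the endpoints (when distinct) are in-bounds, nonzero, equal-valued
theorem pvConn_stay (g : List (List Int)) (p q : Int × Int) (h : pvConn g p q) :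
    p = q ∨ (pvInb g p ∧ pvInb g q ∧ pvVal g q = pvVal g p ∧ pvVal g p ≠ 0) := by
  induction h with
  | refl => exact Or.inl rfl
  | tail _ hadj ih =>
      obtain ⟨hp', hq', hv', he', _⟩ := hadj
      rcases ih with rfl | ⟨hp, hb, hv, hnz⟩
      · exact Or.inr ⟨hp', hq', he', hv'⟩
      · exact Or.inr ⟨hp, hq', by rw [he', hv], hnz⟩

theorem pvZ_inb (g : List (List Int)) (p : Int × Int) (h : pvZ g p) :
    pvInb g p ∧ pvVal g p ≠ 0 := by
  obtain ⟨r1, r2, c1, c2, hcls, h1, h2, h3, h4⟩ := h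
  have hmem : (p.1 + 1, p.2) ∈ {q | pvConn g p q} := by
    rw [hcls]; exact ⟨by omega, by omega, by omega, by omega⟩
  have hconn : pvConn g p (p.1 + 1, p.2) := hmem
  rcases pvConn_stay g _ _ hconn with heq | ⟨hp, _, _, hnz⟩
  · exfalso; have := congrArg Prod.fst heq; simp at this
  · exact ⟨hp, hnz⟩

-- ---------- Stage 2: matrix access/update lemmas ----------

theorem pvGetD_set {α : Type} (l : List α) (i j : ℕ) (a : α) (d : α) :
    (l.set i a).getD j d = if j = i ∧ i < l.length then a else l.getD j d := by
  rw [List.getD_eq_getElem?_getD, List.getD_eq_getElem?_getD, List.getElem?_set]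
  by_cases h1 : j = i
  · subst h1; by_cases h2 : j < l.length <;> simp [h2]
  · simp [Ne.symm h1, h1]

theorem pvSet_getD {α : Type} (m : List (List α)) (r c : Int) (x d : α) (r' c' : ℕ)
    (h0 : 0 ≤ r) (h0' : 0 ≤ c) (hr : r.toNat < m.length)
    (hc : c.toNat < (m.getD r.toNat []).length) :
    ((pvAset m r c x).getD r' []).getD c' d =
      if (r' : Int) = r ∧ (c' : Int) = c then x else (m.getD r' []).getD c' d := by
  unfold pvAset
  have hrr : ((r.toNat : ℕ) : Int) = r := Int.toNat_of_nonneg h0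
  have hcc : ((c.toNat : ℕ) : Int) = c := Int.toNat_of_nonneg h0'
  rw [pvGetD_set]
  by_cases hre : r' = r.toNat
  · subst hre
    rw [if_pos ⟨rfl, hr⟩, pvGetD_set]
    by_cases hce : c' = c.toNat
    · subst hce
      rw [if_pos ⟨rfl, hc⟩, if_pos ⟨hrr, hcc⟩]
    · have hne : ¬((c' : Int) = c) := by omega
      rw [if_neg (fun h => hce h.1), if_neg (by rintro ⟨_, h⟩; exact hne h)]
  · have hne : ¬((r' : Int) = r) := by omega
    rw [if_neg (fun h => hre h.1), if_neg (by rintro ⟨h, _⟩; exact hne h)]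

theorem pvReplicate_getD {α : Type} (n : ℕ) (x : α) (i : ℕ) (d : α) :
    (List.replicate n x).getD i d = if i < n then x else d := by
  rw [List.getD_eq_getElem?_getD, List.getElem?_replicate]
  by_cases h : i < n <;> simp [h]

-- shapes
def pvGShape (g m : List (List Int)) : Prop :=
  m.length = g.length ∧ ∀ r : ℕ, (m.getD r []).length = (g.getD r []).length

def pvVShape (g : List (List Int)) (v : List (List Bool)) : Prop :=
  v.length = g.length ∧ ∀ r : ℕ, r < v.length → (v.getD r []).length = (pvW g).toNat

-- Pre_: every row is at least pvW g long
theorem pvRow_len (g : List (List Int)) (hpre : Pre_transform g) (r : ℕ) (hr : r < g.length) :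
    (pvW g).toNat ≤ (g.getD r []).length := by
  have hmem : g.getD r [] ∈ g := by
    rw [List.getD_eq_getElem g [] hr]; exact List.getElem_mem hr
  have := hpre _ hmem
  unfold pvW; omega

-- the visited matrix represents the set S
def pvVis (g : List (List Int)) (v : List (List Bool)) (S : Set (Int × Int)) : Prop :=
  pvVShape g v ∧ (∀ p : Int × Int, pvInb g p → (pvAgetB v p.1 p.2 = true ↔ p ∈ S)) ∧
    S ⊆ {p | pvInb g p}

theorem pvVis_init (g : List (List Int)) :
    pvVis g (List.replicate g.length (List.replicate (pvW g).toNat false)) (∅ : Set (Int × Int)) := by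
  refine ⟨⟨by simp, ?_⟩, ?_, by simp⟩
  · intro r hr
    simp only [List.length_replicate] at hr
    rw [pvReplicate_getD, if_pos hr, List.length_replicate]
  · intro p hp
    obtain ⟨h1, h2, h3, h4⟩ := hp
    simp only [pvAgetB, Set.mem_empty_iff_false, iff_false]
    have hr : p.1.toNat < g.length := by unfold pvH at h2; omega
    have hc : p.2.toNat < (pvW g).toNat := by omega
    rw [pvReplicate_getD, if_pos hr, pvReplicate_getD, if_pos hc]
    simp

theorem pvVis_insert (g : List (List Int)) (v : List (List Bool)) (S : Set (Int × Int))
    (h : pvVis g v S) (p : Int × Int) (hp : pvInb g p) :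
    pvVis g (pvAset v p.1 p.2 true) (S ∪ {p}) := by
  obtain ⟨⟨hlen, hrow⟩, hiff, hsub⟩ := h
  obtain ⟨h1, h2, h3, h4⟩ := hp
  have hrn : p.1.toNat < v.length := by simp [pvH] at h2; omega
  have hcn : p.2.toNat < (v.getD p.1.toNat []).length := by
    rw [hrow _ hrn]; omega
  refine ⟨⟨by simp [pvAset, hlen], ?_⟩, ?_, ?_⟩
  · intro r hr
    simp only [pvAset, List.length_set] at hr
    unfold pvAset
    rw [pvGetD_set]
    by_cases hre : r = p.1.toNat
    · subst hre
      rw [if_pos ⟨rfl, hrn⟩, List.length_set]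
      exact hrow _ hrn
    · rw [if_neg (fun h => hre h.1)]
      exact hrow _ hr
  · intro q hq
    unfold pvAgetB
    rw [pvSet_getD v p.1 p.2 true false q.1.toNat q.2.toNat h1 h3 hrn hcn]
    obtain ⟨g1, g2, g3, g4⟩ := hq
    rw [Int.toNat_of_nonneg g1, Int.toNat_of_nonneg g3]
    by_cases he : q = p
    · subst he; simp
    · have : ¬(q.1 = p.1 ∧ q.2 = p.2) := by
        intro ⟨a, b⟩; exact he (Prod.ext a b)
      simp only [this, if_false]
      have := hiff q ⟨g1, g2, g3, g4⟩
      unfold pvAgetB at this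
      rw [this]
      simp [he]
  · intro q hq
    rcases hq with hq | hq
    · exact hsub hq
    · simp at hq; subst hq; exact ⟨h1, h2, h3, h4⟩

-- current-grid description: cells of S with pvZ are zeroed, everything else untouched
def pvGDescr (g cur : List (List Int)) (S : Set (Int × Int)) : Prop :=
  pvGShape g cur ∧ ∀ r c : ℕ,
    ((pvZ g ((r : Int), (c : Int)) ∧ ((r : Int), (c : Int)) ∈ S) →
      (cur.getD r []).getD c 0 = 0) ∧
    (¬(pvZ g ((r : Int), (c : Int)) ∧ ((r : Int), (c : Int)) ∈ S) →
      (cur.getD r []).getD c 0 = (g.getD r []).getD c 0)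

theorem pvGDescr_read (g cur : List (List Int)) (S : Set (Int × Int))
    (h : pvGDescr g cur S) (p : Int × Int) (hp : pvInb g p) (hns : p ∉ S) :
    pvAget cur p.1 p.2 = pvVal g p := by
  obtain ⟨_, hdes⟩ := h
  obtain ⟨h1, _, h3, _⟩ := hp
  have := (hdes p.1.toNat p.2.toNat).2
  rw [Int.toNat_of_nonneg h1, Int.toNat_of_nonneg h3] at this
  unfold pvAget pvVal pvAget
  exact this (by rintro ⟨_, hm⟩; exact hns hm)

-- ---------- Stage 3: components, bounding boxes, the full-rectangle test ----------

noncomputable def pvBoxF (g : List (List Int)) : Finset (Int × Int) :=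
  Finset.Icc (0 : Int) (pvH g - 1) ×ˢ Finset.Icc (0 : Int) (pvW g - 1)

theorem pvMem_boxF (g : List (List Int)) (p : Int × Int) : p ∈ pvBoxF g ↔ pvInb g p := by
  unfold pvBoxF pvInb
  rw [Finset.mem_product, Finset.mem_Icc, Finset.mem_Icc]
  omega

noncomputable def pvCF (g : List (List Int)) (s : Int × Int) : Finset (Int × Int) :=
  @Finset.filter _ (fun q => pvConn g s q) (Classical.decPred _) (pvBoxF g)

theorem pvMem_CF (g : List (List Int)) (s : Int × Int) (hs : pvInb g s) (q : Int × Int) :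
    q ∈ pvCF g s ↔ pvConn g s q := by
  classical
  unfold pvCF
  rw [Finset.mem_filter, pvMem_boxF]
  constructor
  · exact fun h => h.2
  · intro h
    refine ⟨?_, h⟩
    rcases pvConn_stay g s q h with rfl | ⟨_, hq, _, _⟩
    · exact hs
    · exact hq

theorem pvCF_card_le (g : List (List Int)) (s : Int × Int) :
    (pvCF g s).card ≤ (pvH g).toNat * (pvW g).toNat := by
  classical
  have h1 : (pvCF g s).card ≤ (pvBoxF g).card := Finset.card_filter_le _ _
  have h2 : (pvBoxF g).card = (pvH g).toNat * (pvW g).toNat := by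
    unfold pvBoxF
    rw [Finset.card_product, Int.card_Icc, Int.card_Icc]
    have e1 : pvH g - 1 + 1 - 0 = pvH g := by ring
    have e2 : pvW g - 1 + 1 - 0 = pvW g := by ring
    rw [e1, e2]
  omega

theorem pvMinD_spec (l : List Int) (hl : l ≠ []) :
    (PySem.List.min? l (fun z => z)).getD 0 ∈ l ∧
      ∀ x ∈ l, (PySem.List.min? l (fun z => z)).getD 0 ≤ x := by
  cases hm : PySem.List.min? l (fun z => z) with
  | none => exact absurd ((PySem.List.min?_eq_none_iff l _).1 hm) hl
  | some m =>
      simp only [Option.getD_some]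
      exact ⟨PySem.List.min?_mem hm, fun x hx => PySem.List.min?_isMin hm x hx⟩

theorem pvMaxD_spec (l : List Int) (hl : l ≠ []) :
    (PySem.List.max? l (fun z => z)).getD 0 ∈ l ∧
      ∀ x ∈ l, x ≤ (PySem.List.max? l (fun z => z)).getD 0 := by
  cases hm : PySem.List.max? l (fun z => z) with
  | none => exact absurd ((PySem.List.max?_eq_none_iff l _).1 hm) hl
  | some m =>
      simp only [Option.getD_some]
      exact ⟨PySem.List.max?_mem hm, fun x hx => PySem.List.max?_isMax hm x hx⟩

def pvIsComp (g : List (List Int)) (s : Int × Int) (comp : List (Int × Int)) : Prop :=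
  pvInb g s ∧ pvVal g s ≠ 0 ∧ comp.Nodup ∧ ∀ x, x ∈ comp ↔ pvConn g s x

theorem pvComp_length (g : List (List Int)) (s : Int × Int) (comp : List (Int × Int))
    (h : pvIsComp g s comp) : comp.length = (pvCF g s).card := by
  obtain ⟨hs, _, hnd, hchar⟩ := h
  have : comp.toFinset = pvCF g s := by
    apply Finset.ext
    intro q
    rw [List.mem_toFinset, pvMem_CF g s hs, hchar]
  rw [← this, List.toFinset_card_of_nodup hnd]

-- bundles the four min/max facts the ports compute
def pvMM (comp : List (Int × Int)) (mnr mxr mnc mxc : Int) : Prop :=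
  ((∃ q ∈ comp, q.1 = mnr) ∧ ∀ q ∈ comp, mnr ≤ q.1) ∧
  ((∃ q ∈ comp, q.1 = mxr) ∧ ∀ q ∈ comp, q.1 ≤ mxr) ∧
  ((∃ q ∈ comp, q.2 = mnc) ∧ ∀ q ∈ comp, mnc ≤ q.2) ∧
  ((∃ q ∈ comp, q.2 = mxc) ∧ ∀ q ∈ comp, q.2 ≤ mxc)

theorem pvMM_of_ports (comp : List (Int × Int)) (hne : comp ≠ []) :
    pvMM comp ((PySem.List.min? (comp.map (·.1)) (fun z => z)).getD 0)
      ((PySem.List.max? (comp.map (·.1)) (fun z => z)).getD 0)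
      ((PySem.List.min? (comp.map (·.2)) (fun z => z)).getD 0)
      ((PySem.List.max? (comp.map (·.2)) (fun z => z)).getD 0) := by
  have hne1 : comp.map (·.1) ≠ [] := by simpa using hne
  have hne2 : comp.map (·.2) ≠ [] := by simpa using hne
  obtain ⟨m1a, m1b⟩ := pvMinD_spec _ hne1
  obtain ⟨m2a, m2b⟩ := pvMaxD_spec _ hne1
  obtain ⟨m3a, m3b⟩ := pvMinD_spec _ hne2
  obtain ⟨m4a, m4b⟩ := pvMaxD_spec _ hne2
  refine ⟨⟨?_, ?_⟩, ⟨?_, ?_⟩, ⟨?_, ?_⟩, ⟨?_, ?_⟩⟩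
  · obtain ⟨q, hq, he⟩ := List.mem_map.1 m1a; exact ⟨q, hq, he⟩
  · intro q hq; exact m1b _ (List.mem_map_of_mem hq)
  · obtain ⟨q, hq, he⟩ := List.mem_map.1 m2a; exact ⟨q, hq, he⟩
  · intro q hq; exact m2b _ (List.mem_map_of_mem hq)
  · obtain ⟨q, hq, he⟩ := List.mem_map.1 m3a; exact ⟨q, hq, he⟩
  · intro q hq; exact m3b _ (List.mem_map_of_mem hq)
  · obtain ⟨q, hq, he⟩ := List.mem_map.1 m4a; exact ⟨q, hq, he⟩
  · intro q hq; exact m4b _ (List.mem_map_of_mem hq)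

theorem pvComp_full_box (g : List (List Int)) (s : Int × Int) (comp : List (Int × Int))
    (hcomp : pvIsComp g s comp) (mnr mxr mnc mxc : Int) (hmm : pvMM comp mnr mxr mnc mxc)
    (hfull : (comp.length : Int) = (mxr - mnr + 1) * (mxc - mnc + 1)) :
    {q | pvConn g s q} = pvBoxS mnr mxr mnc mxc := by
  obtain ⟨hs, hnz, hnd, hchar⟩ := hcomp
  obtain ⟨hmnr, hmxr, hmnc, hmxc⟩ := hmm
  have hsmem : s ∈ comp := (hchar s).2 Relation.ReflTransGen.refl
  have h1 : mnr ≤ mxr := le_trans (hmnr.2 s hsmem) (hmxr.2 s hsmem)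
  have h2 : mnc ≤ mxc := le_trans (hmnc.2 s hsmem) (hmxc.2 s hsmem)
  have hsub : pvCF g s ⊆ Finset.Icc mnr mxr ×ˢ Finset.Icc mnc mxc := by
    intro q hq
    have hconn := (pvMem_CF g s hs q).1 hq
    have hq' : q ∈ comp := (hchar q).2 hconn
    rw [Finset.mem_product, Finset.mem_Icc, Finset.mem_Icc]
    exact ⟨⟨hmnr.2 q hq', hmxr.2 q hq'⟩, hmnc.2 q hq', hmxc.2 q hq'⟩
  have hcardR : (((Finset.Icc mnr mxr ×ˢ Finset.Icc mnc mxc).card : ℕ) : Int) =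
      (mxr - mnr + 1) * (mxc - mnc + 1) := by
    rw [Finset.card_product, Int.card_Icc, Int.card_Icc, Nat.cast_mul]
    have e1 : ((mxr + 1 - mnr).toNat : Int) = mxr - mnr + 1 := by omega
    have e2 : ((mxc + 1 - mnc).toNat : Int) = mxc - mnc + 1 := by omega
    rw [e1, e2]
  have hlen : comp.length = (pvCF g s).card := pvComp_length g s comp ⟨hs, hnz, hnd, hchar⟩
  have hcards : (Finset.Icc mnr mxr ×ˢ Finset.Icc mnc mxc).card ≤ (pvCF g s).card := by
    omega
  have hEQ : pvCF g s = Finset.Icc mnr mxr ×ˢ Finset.Icc mnc mxc :=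
    Finset.eq_of_subset_of_card_le hsub hcards
  apply Set.ext
  intro q
  rw [Set.mem_setOf_eq, ← pvMem_CF g s hs q, hEQ]
  simp only [Finset.mem_product, Finset.mem_Icc, pvBoxS, Set.mem_setOf_eq]
  omega

theorem pvComp_box_full (g : List (List Int)) (s : Int × Int) (comp : List (Int × Int))
    (hcomp : pvIsComp g s comp) (mnr mxr mnc mxc : Int) (hmm : pvMM comp mnr mxr mnc mxc)
    (a b c d : Int) (hbox : {q | pvConn g s q} = pvBoxS a b c d) :
    mnr = a ∧ mxr = b ∧ mnc = c ∧ mxc = d ∧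
      (comp.length : Int) = (mxr - mnr + 1) * (mxc - mnc + 1) := by
  obtain ⟨hs, hnz, hnd, hchar⟩ := hcomp
  obtain ⟨hmnr, hmxr, hmnc, hmxc⟩ := hmm
  have hsmem : s ∈ comp := (hchar s).2 Relation.ReflTransGen.refl
  have hbox' : ∀ q : Int × Int, pvConn g s q ↔ (a ≤ q.1 ∧ q.1 ≤ b ∧ c ≤ q.2 ∧ q.2 ≤ d) := by
    intro q
    have := Set.ext_iff.mp hbox q
    simpa [pvBoxS] using this
  have hsin := (hbox' s).1 Relation.ReflTransGen.refl
  have hin : ∀ q ∈ comp, a ≤ q.1 ∧ q.1 ≤ b ∧ c ≤ q.2 ∧ q.2 ≤ d :=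
    fun q hq => (hbox' q).1 ((hchar q).1 hq)
  have hca : ((a, s.2) : Int × Int) ∈ comp := (hchar _).2 ((hbox' _).2 (by simp; omega))
  have hcb : ((b, s.2) : Int × Int) ∈ comp := (hchar _).2 ((hbox' _).2 (by simp; omega))
  have hcc : ((s.1, c) : Int × Int) ∈ comp := (hchar _).2 ((hbox' _).2 (by simp; omega))
  have hcd : ((s.1, d) : Int × Int) ∈ comp := (hchar _).2 ((hbox' _).2 (by simp; omega))
  obtain ⟨q1, hq1, he1⟩ := hmnr.1
  obtain ⟨q2, hq2, he2⟩ := hmxr.1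
  obtain ⟨q3, hq3, he3⟩ := hmnc.1
  obtain ⟨q4, hq4, he4⟩ := hmxc.1
  have b1 := hin q1 hq1
  have b2 := hin q2 hq2
  have b3 := hin q3 hq3
  have b4 := hin q4 hq4
  have c1 := hmnr.2 _ hca
  have c2 := hmxr.2 _ hcb
  have c3 := hmnc.2 _ hcc
  have c4 := hmxc.2 _ hcd
  have hea : mnr = a := by simp at c1; omega
  have heb : mxr = b := by simp at c2; omega
  have hec : mnc = c := by simp at c3; omega
  have hed : mxc = d := by simp at c4; omega
  refine ⟨hea, heb, hec, hed, ?_⟩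
  have hEQ : pvCF g s = Finset.Icc a b ×ˢ Finset.Icc c d := by
    apply Finset.ext
    intro q
    rw [pvMem_CF g s hs, hbox' q, Finset.mem_product, Finset.mem_Icc, Finset.mem_Icc]
    omega
  have hlen : comp.length = (pvCF g s).card := pvComp_length g s comp ⟨hs, hnz, hnd, hchar⟩
  have hcardR : (((Finset.Icc a b ×ˢ Finset.Icc c d).card : ℕ) : Int) = (b - a + 1) * (d - c + 1) := by
    rw [Finset.card_product, Int.card_Icc, Int.card_Icc, Nat.cast_mul]
    have e1 : ((b + 1 - a).toNat : Int) = b - a + 1 := by omega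
    have e2 : ((d + 1 - c).toNat : Int) = d - c + 1 := by omega
    rw [e1, e2]
  rw [hea, heb, hec, hed, hlen, hEQ]
  exact hcardR

theorem pvClass_eq_of_mem (g : List (List Int)) (s q : Int × Int) (hconn : pvConn g s q) :
    {x | pvConn g q x} = {x | pvConn g s x} := by
  apply Set.ext
  intro x
  simp only [Set.mem_setOf_eq]
  constructor
  · exact fun h => pvConn_trans g s q x hconn h
  · exact fun h => pvConn_trans g q s x (pvConn_symm g s q hconn) h

theorem pvComp_Z_iff (g : List (List Int)) (s : Int × Int) (comp : List (Int × Int))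
    (hcomp : pvIsComp g s comp) (mnr mxr mnc mxc : Int) (hmm : pvMM comp mnr mxr mnc mxc)
    (q : Int × Int) (hq : q ∈ comp) :
    pvZ g q ↔ ((comp.length : Int) = (mxr - mnr + 1) * (mxc - mnc + 1) ∧
      mnr < q.1 ∧ q.1 < mxr ∧ mnc < q.2 ∧ q.2 < mxc) := by
  have hconn : pvConn g s q := (hcomp.2.2.2 q).1 hq
  have hcls : {x | pvConn g q x} = {x | pvConn g s x} := pvClass_eq_of_mem g s q hconn
  constructor
  · rintro ⟨a, b, c, d, hbox, s1, s2, s3, s4⟩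
    rw [hcls] at hbox
    obtain ⟨hea, heb, hec, hed, hfull⟩ := pvComp_box_full g s comp hcomp _ _ _ _ hmm a b c d hbox
    exact ⟨hfull, by omega, by omega, by omega, by omega⟩
  · rintro ⟨hfull, s1, s2, s3, s4⟩
    have hbox := pvComp_full_box g s comp hcomp _ _ _ _ hmm hfull
    exact ⟨mnr, mxr, mnc, mxc, by rw [hcls]; exact hbox, s1, s2, s3, s4⟩

-- A's "≠ all four bounds" is the strict-interior test for members of the component
theorem pvA_cond_iff (comp : List (Int × Int)) (mnr mxr mnc mxc : Int)
    (hmm : pvMM comp mnr mxr mnc mxc) (q : Int × Int) (hq : q ∈ comp) :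
    (q.1 ≠ mnr ∧ q.1 ≠ mxr ∧ q.2 ≠ mnc ∧ q.2 ≠ mxc) ↔
      (mnr < q.1 ∧ q.1 < mxr ∧ mnc < q.2 ∧ q.2 < mxc) := by
  obtain ⟨hmnr, hmxr, hmnc, hmxc⟩ := hmm
  have b1 := hmnr.2 q hq
  have b2 := hmxr.2 q hq
  have b3 := hmnc.2 q hq
  have b4 := hmxc.2 q hq
  omega

-- no member of a non-full component is hollowed
theorem pvComp_not_full_no_Z (g : List (List Int)) (s : Int × Int) (comp : List (Int × Int))
    (hcomp : pvIsComp g s comp) (mnr mxr mnc mxc : Int) (hmm : pvMM comp mnr mxr mnc mxc)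
    (hnf : (comp.length : Int) ≠ (mxr - mnr + 1) * (mxc - mnc + 1)) :
    ∀ q ∈ comp, ¬ pvZ g q := by
  intro q hq hz
  exact hnf ((pvComp_Z_iff g s comp hcomp _ _ _ _ hmm q hq).1 hz).1

-- ---------- Stage 4: the hollowing writes, pointwise ----------

theorem pvAset_rowlen {α : Type} (m : List (List α)) (r c : Int) (x : α) (r' : ℕ) :
    ((pvAset m r c x).getD r' []).length = (m.getD r' []).length := by
  unfold pvAset
  rw [pvGetD_set]
  by_cases hre : r' = r.toNat
  · subst hre
    by_cases hl : r.toNat < m.length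
    · rw [if_pos ⟨rfl, hl⟩, List.length_set]
    · rw [if_neg (fun h => hl h.2)]
  · rw [if_neg (fun h => hre h.1)]

theorem pvZeroFold (g : List (List Int)) (hpre : Pre_transform g)
    (C : Int × Int → Prop) [DecidablePred C] :
    ∀ (comp : List (Int × Int)) (G : List (List Int)), pvGShape g G →
    (∀ p ∈ comp, pvInb g p) →
    pvGShape g (comp.foldl (fun gg p => if C p then pvAset gg p.1 p.2 0 else gg) G) ∧
    ∀ r c : ℕ,
      (((comp.foldl (fun gg p => if C p then pvAset gg p.1 p.2 0 else gg) G).getD r []).getD c 0 =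
        if (∃ p ∈ comp, C p ∧ p.1 = (r : Int) ∧ p.2 = (c : Int)) then 0
        else (G.getD r []).getD c 0) := by
  intro comp
  induction comp with
  | nil => intro G hGs _; exact ⟨hGs, fun r c => by simp⟩
  | cons p rest ih =>
      intro G hGs hin
      have hp : pvInb g p := hin p (by simp)
      obtain ⟨hp1, hp2, hp3, hp4⟩ := hp
      unfold pvH at hp2
      have hplen : p.1.toNat < g.length := by omega
      have hrn : p.1.toNat < G.length := by rw [hGs.1]; exact hplen
      have hcn : p.2.toNat < (G.getD p.1.toNat []).length := by
        rw [hGs.2 p.1.toNat]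
        have := pvRow_len g hpre p.1.toNat hplen
        omega
      have hGs' : pvGShape g (if C p then pvAset G p.1 p.2 0 else G) := by
        by_cases hC : C p
        · rw [if_pos hC]
          exact ⟨by unfold pvAset; rw [List.length_set]; exact hGs.1,
            fun r => by rw [pvAset_rowlen]; exact hGs.2 r⟩
        · rw [if_neg hC]; exact hGs
      have step := ih (if C p then pvAset G p.1 p.2 0 else G) hGs'
        (fun q hq => hin q (by simp [hq]))
      rw [List.foldl_cons]
      refine ⟨step.1, ?_⟩
      intro r c
      rw [step.2 r c]
      by_cases hrest : ∃ q ∈ rest, C q ∧ q.1 = (r : Int) ∧ q.2 = (c : Int)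
      · have hcons : ∃ q ∈ p :: rest, C q ∧ q.1 = (r : Int) ∧ q.2 = (c : Int) := by
          obtain ⟨q, hqm, hqc⟩ := hrest
          exact ⟨q, List.mem_cons_of_mem _ hqm, hqc⟩
        rw [if_pos hrest, if_pos hcons]
      · rw [if_neg hrest]
        by_cases hcp : C p ∧ p.1 = (r : Int) ∧ p.2 = (c : Int)
        · have hcons : ∃ q ∈ p :: rest, C q ∧ q.1 = (r : Int) ∧ q.2 = (c : Int) :=
            ⟨p, by simp, hcp⟩
          rw [if_pos hcons, if_pos hcp.1,
            pvSet_getD G p.1 p.2 0 0 r c hp1 hp3 hrn hcn,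
            if_pos ⟨hcp.2.1.symm, hcp.2.2.symm⟩]
        · have hcons : ¬∃ q ∈ p :: rest, C q ∧ q.1 = (r : Int) ∧ q.2 = (c : Int) := by
            rintro ⟨q, hq, hqc⟩
            rcases List.mem_cons.1 hq with rfl | hq'
            · exact hcp hqc
            · exact hrest ⟨q, hq', hqc⟩
          rw [if_neg hcons]
          by_cases hC : C p
          · rw [if_pos hC, pvSet_getD G p.1 p.2 0 0 r c hp1 hp3 hrn hcn,
              if_neg (by rintro ⟨ha, hb⟩; exact hcp ⟨hC, ha.symm, hb.symm⟩)]
          · rw [if_neg hC]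

-- ---------- Stage 5: A side — BFS computes the component; the scan yields pvDescr ----------

theorem pvWif (g : List (List Int)) :
    (if g.length > 0 then ((g.headD []).length : Int) else 0) = pvW g := by
  cases g with
  | nil => simp [pvW]
  | cons a t => simp [pvW]

theorem pvNest_foldl {σ : Type} (rows cols : List Int) (f : σ → Int → Int → σ) (init : σ) :
    rows.foldl (fun st r => cols.foldl (fun st c => f st r c) st) init =
      (rows.flatMap (fun r => cols.map (fun c => (r, c)))).foldl
        (fun st (p : Int × Int) => f st p.1 p.2) init := by
  induction rows generalizing init with
  | nil => rfl
  | cons r rows ih =>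
      rw [List.foldl_cons, List.flatMap_cons, List.foldl_append, List.foldl_map, ih]

def pvCells (g : List (List Int)) : List (Int × Int) :=
  (PySem.List.pyRange 0 (pvH g) 1).flatMap
    (fun r => (PySem.List.pyRange 0 (pvW g) 1).map (fun c => (r, c)))

theorem pvMem_cells (g : List (List Int)) (p : Int × Int) : p ∈ pvCells g ↔ pvInb g p := by
  unfold pvCells pvInb
  rw [List.mem_flatMap]
  constructor
  · rintro ⟨r, hr, hm⟩
    rw [List.mem_map] at hm
    obtain ⟨c, hc, rfl⟩ := hm
    rw [PySem.List.mem_pyRange_one] at hr hc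
    exact ⟨hr.1, hr.2, hc.1, hc.2⟩
  · rintro ⟨h1, h2, h3, h4⟩
    refine ⟨p.1, ?_, ?_⟩
    · rw [PySem.List.mem_pyRange_one]; exact ⟨h1, h2⟩
    · rw [List.mem_map]
      exact ⟨p.2, by rw [PySem.List.mem_pyRange_one]; exact ⟨h3, h4⟩, by simp⟩

theorem pvLen_le_card (l : List (Int × Int)) (F : Finset (Int × Int)) (hnd : l.Nodup)
    (hsub : ∀ x ∈ l, x ∈ F) : l.length ≤ F.card := by
  classical
  have h1 : l.toFinset ⊆ F := fun x hx => hsub x (List.mem_toFinset.1 hx)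
  rw [← List.toFinset_card_of_nodup hnd]
  exact Finset.card_le_card h1

theorem pvConn_inb (g : List (List Int)) (s x : Int × Int) (hconn : pvConn g s x)
    (hs : pvInb g s) : pvInb g x := by
  rcases pvConn_stay g s x hconn with rfl | ⟨_, hx, _, _⟩
  · exact hs
  · exact hx

theorem pvConn_val (g : List (List Int)) (s x : Int × Int) (hconn : pvConn g s x) :
    pvVal g x = pvVal g s := by
  rcases pvConn_stay g s x hconn with rfl | ⟨_, _, hv, _⟩
  · rfl
  · exact hv

theorem pvAdj_offset (g : List (List Int)) (x z : Int × Int) (h : pvAdj g x z) :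
    ∃ d ∈ pvAdirs, z = (x.1 + d.1, x.2 + d.2) := by
  obtain ⟨_, _, _, _, hd⟩ := h
  rcases hd with h | h | h | h
  · exact ⟨(1, 0), by simp [pvAdirs], by rw [h]; simp⟩
  · exact ⟨(-1, 0), by simp [pvAdirs], by rw [h]; simp; ring⟩
  · exact ⟨(0, 1), by simp [pvAdirs], by rw [h]; simp⟩
  · exact ⟨(0, -1), by simp [pvAdirs], by rw [h]; simp; ring⟩

-- pvUSet: the union of the components of the seeds already processed
def pvUSet (g : List (List Int)) (done : List (Int × Int)) : Set (Int × Int) :=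
  {q | ∃ p ∈ done, pvVal g p ≠ 0 ∧ pvInb g p ∧ pvConn g p q}

theorem pvUSet_append_zero (g : List (List Int)) (done : List (Int × Int)) (s : Int × Int)
    (hz : pvVal g s = 0) : pvUSet g (done ++ [s]) = pvUSet g done := by
  apply Set.ext
  intro q
  unfold pvUSet
  simp only [Set.mem_setOf_eq, List.mem_append, List.mem_singleton]
  constructor
  · rintro ⟨p, hp | rfl, hnz, hinb, hconn⟩
    · exact ⟨p, hp, hnz, hinb, hconn⟩
    · exact absurd hz hnz
  · rintro ⟨p, hp, hnz, hinb, hconn⟩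
    exact ⟨p, Or.inl hp, hnz, hinb, hconn⟩

theorem pvUSet_append_mem (g : List (List Int)) (done : List (Int × Int)) (s : Int × Int)
    (hmem : s ∈ pvUSet g done) : pvUSet g (done ++ [s]) = pvUSet g done := by
  obtain ⟨p0, hp0, hnz0, hinb0, hconn0⟩ := hmem
  apply Set.ext
  intro q
  unfold pvUSet
  simp only [Set.mem_setOf_eq, List.mem_append, List.mem_singleton]
  constructor
  · rintro ⟨p, hp | rfl, hnz, hinb, hconn⟩
    · exact ⟨p, hp, hnz, hinb, hconn⟩
    · exact ⟨p0, hp0, hnz0, hinb0, pvConn_trans g p0 p q hconn0 hconn⟩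
  · rintro ⟨p, hp, hnz, hinb, hconn⟩
    exact ⟨p, Or.inl hp, hnz, hinb, hconn⟩

theorem pvUSet_append_new (g : List (List Int)) (done : List (Int × Int)) (s : Int × Int)
    (hinb : pvInb g s) (hnz : pvVal g s ≠ 0) :
    pvUSet g (done ++ [s]) = pvUSet g done ∪ {z | pvConn g s z} := by
  apply Set.ext
  intro q
  unfold pvUSet
  simp only [Set.mem_setOf_eq, List.mem_append, List.mem_singleton, Set.mem_union]
  constructor
  · rintro ⟨p, hp | rfl, hnzp, hinbp, hconn⟩
    · exact Or.inl ⟨p, hp, hnzp, hinbp, hconn⟩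
    · exact Or.inr hconn
  · rintro (⟨p, hp, hnzp, hinbp, hconn⟩ | hconn)
    · exact ⟨p, Or.inl hp, hnzp, hinbp, hconn⟩
    · exact ⟨s, Or.inr rfl, hnz, hinb, hconn⟩

theorem pvUSet_disj (g : List (List Int)) (done : List (Int × Int)) (s : Int × Int)
    (hnot : s ∉ pvUSet g done) : ∀ q, pvConn g s q → q ∉ pvUSet g done := by
  rintro q hq ⟨p, hp, hnzp, hinbp, hpq⟩
  exact hnot ⟨p, hp, hnzp, hinbp, pvConn_trans g p q s hpq (pvConn_symm g s q hq)⟩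

-- one pass over (a suffix of) the four directions
theorem pvPush_fold (g gcur : List (List Int)) (V : Set (Int × Int)) (s x : Int × Int)
    (colour : Int) (hcol : colour = pvVal g s)
    (hread : ∀ p, pvInb g p → p ∉ V → pvAget gcur p.1 p.2 = pvVal g p)
    (hdisj : ∀ q, pvConn g s q → q ∉ V)
    (hs : pvInb g s) (hnz : pvVal g s ≠ 0) (hxconn : pvConn g s x) :
    ∀ (D : List (Int × Int)), (∀ d ∈ D, d ∈ pvAdirs) →
    ∀ (q0 : List (Int × Int)) (vis : List (List Bool)) (L : Set (Int × Int)),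
      pvVis g vis (V ∪ L) → (∀ z ∈ L, pvConn g s z) →
      ∃ (new : List (Int × Int)) (vis' : List (List Bool)),
        D.foldl (pvApush gcur (pvH g) (pvW g) colour x.1 x.2) (q0, vis) = (q0 ++ new, vis') ∧
        new.Nodup ∧
        pvVis g vis' (V ∪ (L ∪ {z | z ∈ new})) ∧
        (∀ z ∈ new, pvAdj g x z ∧ z ∉ V ∪ L) ∧
        (∀ z, pvAdj g x z → (∃ d ∈ D, z = (x.1 + d.1, x.2 + d.2)) → z ∈ V ∪ L ∨ z ∈ new) := by
  intro D
  induction D with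
  | nil =>
      intro _ q0 vis L hvis hL
      refine ⟨[], vis, by simp, List.nodup_nil, ?_, by simp, by simp⟩
      have : (L ∪ {z | z ∈ ([] : List (Int × Int))}) = L := by simp
      rw [this]
      exact hvis
  | cons d D ih =>
      intro hD q0 vis L hvis hL
      have hdmem : d ∈ pvAdirs := hD d List.mem_cons_self
      have hxinb : pvInb g x := pvConn_inb g s x hxconn hs
      have hxval : pvVal g x = pvVal g s := pvConn_val g s x hxconn
      rw [List.foldl_cons]
      have hpush : pvApush gcur (pvH g) (pvW g) colour x.1 x.2 (q0, vis) d =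
          if 0 ≤ x.1 + d.1 ∧ x.1 + d.1 < pvH g ∧ 0 ≤ x.2 + d.2 ∧ x.2 + d.2 < pvW g ∧
              pvAgetB vis (x.1 + d.1) (x.2 + d.2) = false ∧
              pvAget gcur (x.1 + d.1) (x.2 + d.2) = colour then
            (q0 ++ [(x.1 + d.1, x.2 + d.2)], pvAset vis (x.1 + d.1) (x.2 + d.2) true)
          else (q0, vis) := rfl
      have hiff : (0 ≤ x.1 + d.1 ∧ x.1 + d.1 < pvH g ∧ 0 ≤ x.2 + d.2 ∧ x.2 + d.2 < pvW g ∧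
          pvAgetB vis (x.1 + d.1) (x.2 + d.2) = false ∧
          pvAget gcur (x.1 + d.1) (x.2 + d.2) = colour) ↔
          (pvAdj g x (x.1 + d.1, x.2 + d.2) ∧ (x.1 + d.1, x.2 + d.2) ∉ V ∪ L) := by
        constructor
        · rintro ⟨c1, c2, c3, c4, c5, c6⟩
          have hinbz : pvInb g (x.1 + d.1, x.2 + d.2) := ⟨c1, c2, c3, c4⟩
          have hnotin : (x.1 + d.1, x.2 + d.2) ∉ V ∪ L := by
            intro hmem
            have := (hvis.2.1 _ hinbz).2 hmem
            rw [c5] at this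
            exact Bool.false_ne_true this
          have hzV : (x.1 + d.1, x.2 + d.2) ∉ V := fun h => hnotin (Or.inl h)
          have hvalz : pvVal g (x.1 + d.1, x.2 + d.2) = colour := by
            rw [← hread _ hinbz hzV]; exact c6
          refine ⟨⟨hxinb, hinbz, by rw [hxval]; exact hnz,
            by rw [hvalz, hcol, hxval], ?_⟩, hnotin⟩
          · simp only [pvAdirs, List.mem_cons, List.not_mem_nil, or_false] at hdmem
            rcases hdmem with rfl | rfl | rfl | rfl
            · left; simp
            · right; left; simp; constructor <;> ring
            · right; right; left; simp
            · right; right; right; simp; constructor <;> ring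
        · rintro ⟨hadj, hnot⟩
          obtain ⟨_, hinbz, _, hvz, _⟩ := hadj
          obtain ⟨c1, c2, c3, c4⟩ := hinbz
          have hzV : (x.1 + d.1, x.2 + d.2) ∉ V := fun h => hnot (Or.inl h)
          have c5 : pvAgetB vis (x.1 + d.1) (x.2 + d.2) = false := by
            cases hb : pvAgetB vis (x.1 + d.1) (x.2 + d.2) with
            | false => rfl
            | true => exact absurd ((hvis.2.1 _ ⟨c1, c2, c3, c4⟩).1 hb) hnot
          have c6 : pvAget gcur (x.1 + d.1) (x.2 + d.2) = colour := by
            rw [hread _ ⟨c1, c2, c3, c4⟩ hzV]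
            show pvVal g (x.1 + d.1, x.2 + d.2) = colour
            rw [hvz, hxval, hcol]
          exact ⟨c1, c2, c3, c4, c5, c6⟩
      by_cases hcond : pvAdj g x (x.1 + d.1, x.2 + d.2) ∧ (x.1 + d.1, x.2 + d.2) ∉ V ∪ L
      · rw [hpush, if_pos (hiff.2 hcond)]
        obtain ⟨hadj, hnot⟩ := hcond
        have hinbz : pvInb g (x.1 + d.1, x.2 + d.2) := hadj.2.1
        have hvis1 : pvVis g (pvAset vis (x.1 + d.1) (x.2 + d.2) true)
            (V ∪ (L ∪ {(x.1 + d.1, x.2 + d.2)})) := by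
          have h1 := pvVis_insert g vis (V ∪ L) hvis (x.1 + d.1, x.2 + d.2) hinbz
          have heq : (V ∪ L) ∪ {((x.1 + d.1, x.2 + d.2) : Int × Int)} =
              V ∪ (L ∪ {(x.1 + d.1, x.2 + d.2)}) := by rw [Set.union_assoc]
          rw [heq] at h1
          exact h1
        have hL1 : ∀ z ∈ L ∪ {((x.1 + d.1, x.2 + d.2) : Int × Int)}, pvConn g s z := by
          intro z hz
          rcases (Set.mem_union _ _ _).1 hz with hz | hz
          · exact hL z hz
          · rw [Set.mem_singleton_iff] at hz
            subst hz
            exact pvConn_trans g s x _ hxconn (Relation.ReflTransGen.single hadj)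
        obtain ⟨new', vis', heq', hnd', hvis'', hnew', hcompl'⟩ :=
          ih (fun e he => hD e (List.mem_cons_of_mem d he)) (q0 ++ [(x.1 + d.1, x.2 + d.2)])
            (pvAset vis (x.1 + d.1) (x.2 + d.2) true) (L ∪ {(x.1 + d.1, x.2 + d.2)}) hvis1 hL1
        refine ⟨(x.1 + d.1, x.2 + d.2) :: new', vis', ?_, ?_, ?_, ?_, ?_⟩
        · rw [heq']; simp
        · rw [List.nodup_cons]
          exact ⟨fun hmem => (hnew' _ hmem).2 (Or.inr (Or.inr rfl)), hnd'⟩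
        · have hseq : (V ∪ ((L ∪ {((x.1 + d.1, x.2 + d.2) : Int × Int)}) ∪ {z | z ∈ new'})) =
              V ∪ (L ∪ {z | z ∈ (x.1 + d.1, x.2 + d.2) :: new'}) := by
            apply Set.ext
            intro y
            simp only [Set.mem_union, Set.mem_setOf_eq, List.mem_cons, Set.mem_singleton_iff]
            tauto
          rw [← hseq]
          exact hvis''
        · intro z hz
          rcases List.mem_cons.1 hz with rfl | hz'
          · exact ⟨hadj, hnot⟩
          · obtain ⟨ha, hb⟩ := hnew' z hz'
            refine ⟨ha, fun hc => hb ?_⟩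
            rcases hc with hc | hc
            · exact Or.inl hc
            · exact Or.inr (Or.inl hc)
        · rintro z hadjz ⟨d', hd', hoff⟩
          rcases List.mem_cons.1 hd' with rfl | hd'2
          · right
            rw [hoff]
            exact List.mem_cons.2 (Or.inl rfl)
          · rcases hcompl' z hadjz ⟨d', hd'2, hoff⟩ with hin | hin
            · rcases hin with hin | hin | hin
              · exact Or.inl (Or.inl hin)
              · exact Or.inl (Or.inr hin)
              · right
                rw [Set.mem_singleton_iff] at hin
                rw [hin]
                exact List.mem_cons.2 (Or.inl rfl)
            · exact Or.inr (List.mem_cons_of_mem _ hin)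
      · rw [hpush, if_neg (fun hc => hcond (hiff.1 hc))]
        obtain ⟨new', vis', heq', hnd', hvis'', hnew', hcompl'⟩ :=
          ih (fun e he => hD e (List.mem_cons_of_mem d he)) q0 vis L hvis hL
        refine ⟨new', vis', heq', hnd', hvis'', hnew', ?_⟩
        rintro z hadjz ⟨d', hd', hoff⟩
        rcases List.mem_cons.1 hd' with heqd | hd'2
        · rw [heqd] at hoff
          rw [hoff] at hadjz ⊢
          by_cases hm : (x.1 + d.1, x.2 + d.2) ∈ V ∪ L
          · exact Or.inl hm
          · exact absurd ⟨hadjz, hm⟩ hcond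
        · exact hcompl' z hadjz ⟨d', hd'2, hoff⟩

-- the queue is empty: the accumulated component is exactly the class of s
theorem pvBfs_done (g : List (List Int)) (V : Set (Int × Int)) (s : Int × Int)
    (acc : List (Int × Int)) (vis : List (List Bool))
    (hnd : acc.Nodup)
    (hsub : ∀ x ∈ acc, pvConn g s x)
    (hmem : s ∈ acc)
    (hvis : pvVis g vis (V ∪ {z | z ∈ acc}))
    (hclosed : ∀ x ∈ acc, ∀ z, pvAdj g x z → z ∈ acc) :
    acc.Nodup ∧ (∀ x, x ∈ acc ↔ pvConn g s x) ∧ pvVis g vis (V ∪ {z | pvConn g s z}) := by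
  have hchar : ∀ x, x ∈ acc ↔ pvConn g s x := by
    intro x
    constructor
    · exact hsub x
    · intro hconn
      induction hconn with
      | refl => exact hmem
      | tail hc hadj ih => exact hclosed _ ih _ hadj
  have hseq : (V ∪ {z | z ∈ acc}) = V ∪ {z | pvConn g s z} := by
    apply Set.ext
    intro y
    simp only [Set.mem_union, Set.mem_setOf_eq]
    rw [hchar y]
  exact ⟨hnd, hchar, by rw [← hseq]; exact hvis⟩

theorem pvBfs (g gcur : List (List Int)) (V : Set (Int × Int)) (s : Int × Int) (colour : Int)
    (hcol : colour = pvVal g s)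
    (hread : ∀ p, pvInb g p → p ∉ V → pvAget gcur p.1 p.2 = pvVal g p)
    (hdisj : ∀ q, pvConn g s q → q ∉ V)
    (hs : pvInb g s) (hnz : pvVal g s ≠ 0) :
    ∀ (fuel : ℕ) (q acc : List (Int × Int)) (vis : List (List Bool)),
      (acc ++ q).Nodup →
      (∀ x ∈ acc ++ q, pvConn g s x) →
      s ∈ acc ++ q →
      pvVis g vis (V ∪ {z | z ∈ acc ++ q}) →
      (∀ x ∈ acc, ∀ z, pvAdj g x z → z ∈ acc ++ q) →
      (pvCF g s).card ≤ fuel + acc.length →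
      (pvAbfs gcur (pvH g) (pvW g) colour fuel q vis acc).1.Nodup ∧
      (∀ x, x ∈ (pvAbfs gcur (pvH g) (pvW g) colour fuel q vis acc).1 ↔ pvConn g s x) ∧
      pvVis g (pvAbfs gcur (pvH g) (pvW g) colour fuel q vis acc).2
        (V ∪ {z | pvConn g s z}) := by
  intro fuel
  induction fuel with
  | zero =>
      intro q acc vis hnd hsub hmem hvis hclosed hfuel
      cases q with
      | nil =>
          rw [pvAbfs]
          have hnd' : acc.Nodup := by simpa using hnd
          exact pvBfs_done g V s acc vis hnd'
            (fun x hx => hsub x (by simpa using hx))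
            (by simpa using hmem)
            (by simpa using hvis)
            (fun x hx z hz => by simpa using hclosed x (by simpa using hx) z hz)
      | cons p rest =>
          exfalso
          have hle : (acc ++ p :: rest).length ≤ (pvCF g s).card := by
            apply pvLen_le_card _ _ hnd
            intro x hx
            rw [pvMem_CF g s hs]
            exact hsub x hx
          simp only [List.length_append, List.length_cons] at hle
          omega
  | succ fuel ih =>
      intro q acc vis hnd hsub hmem hvis hclosed hfuel
      cases q with
      | nil =>
          rw [pvAbfs]
          have hnd' : acc.Nodup := by simpa using hnd
          exact pvBfs_done g V s acc vis hnd'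
            (fun x hx => hsub x (by simpa using hx))
            (by simpa using hmem)
            (by simpa using hvis)
            (fun x hx z hz => by simpa using hclosed x (by simpa using hx) z hz)
      | cons xy rest =>
          obtain ⟨x, y⟩ := xy
          rw [pvAbfs]
          have hxconn : pvConn g s (x, y) := hsub (x, y) (by simp)
          obtain ⟨new, vis', heq, hndnew, hvis', hnew, hcompl⟩ :=
            pvPush_fold g gcur V s (x, y) colour hcol hread hdisj hs hnz hxconn
              pvAdirs (fun d hd => hd) rest vis {z | z ∈ acc ++ (x, y) :: rest} hvis hsub
          rw [heq]
          have hperm : ∀ z : Int × Int,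
              (z ∈ (acc ++ [(x, y)]) ++ (rest ++ new)) ↔
                (z ∈ (acc ++ (x, y) :: rest) ∨ z ∈ new) := by
            intro z
            simp only [List.mem_append, List.mem_cons]
            tauto
          have heqL : ((acc ++ [(x, y)]) ++ (rest ++ new)) = (acc ++ (x, y) :: rest) ++ new := by
            simp
          have hndall : ((acc ++ [(x, y)]) ++ (rest ++ new)).Nodup := by
            rw [heqL]
            exact List.Nodup.append hnd hndnew (fun a ha hb => (hnew a hb).2 (Or.inr ha))
          apply ih (rest ++ new) (acc ++ [(x, y)]) vis' hndall
          · intro z hz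
            rcases (hperm z).1 hz with hz' | hz'
            · exact hsub z hz'
            · exact pvConn_trans g s (x, y) z hxconn
                (Relation.ReflTransGen.single (hnew z hz').1)
          · exact (hperm s).2 (Or.inl hmem)
          · have hseq : (V ∪ ({z | z ∈ acc ++ (x, y) :: rest} ∪ {z | z ∈ new})) =
                (V ∪ {z | z ∈ (acc ++ [(x, y)]) ++ (rest ++ new)}) := by
              apply Set.ext
              intro z
              simp only [Set.mem_union, Set.mem_setOf_eq]
              rw [hperm z]
            rw [← hseq]
            exact hvis'
          · intro a ha z hz
            rcases List.mem_append.1 ha with ha' | ha'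
            · exact (hperm z).2 (Or.inl (hclosed a ha' z hz))
            · have haxy : a = (x, y) := by simpa using ha'
              rw [haxy] at hz
              obtain ⟨d, hd, hoff⟩ := pvAdj_offset g (x, y) z hz
              rcases hcompl z hz ⟨d, hd, hoff⟩ with hin | hin
              · rcases hin with hin | hin
                · exfalso
                  exact hdisj z
                    (pvConn_trans g s (x, y) z hxconn (Relation.ReflTransGen.single hz)) hin
                · exact (hperm z).2 (Or.inl hin)
              · exact (hperm z).2 (Or.inr hin)
          · simp only [List.length_append, List.length_cons] at hfuel ⊢
            omega

-- hollowing one component, as A does it, preserves the grid description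
theorem pvHollow_core (g : List (List Int)) (hpre : Pre_transform g) (s : Int × Int)
    (comp : List (Int × Int)) (hiscomp : pvIsComp g s comp)
    (G : List (List Int)) (S : Set (Int × Int)) (hgd : pvGDescr g G S)
    (mnr mxr mnc mxc : Int) (hmm : pvMM comp mnr mxr mnc mxc)
    (C : Int × Int → Prop) [DecidablePred C]
    (hC : ∀ q ∈ comp, (C q ↔ (mnr < q.1 ∧ q.1 < mxr ∧ mnc < q.2 ∧ q.2 < mxc)))
    (out : List (List Int))
    (hout : out = if (comp.length : Int) = (mxr - mnr + 1) * (mxc - mnc + 1) then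
        comp.foldl (fun gg p => if C p then pvAset gg p.1 p.2 0 else gg) G else G) :
    pvGDescr g out (S ∪ {z | pvConn g s z}) := by
  have hchar := hiscomp.2.2.2
  have hinb : ∀ p ∈ comp, pvInb g p :=
    fun p hp => pvConn_inb g s p ((hchar p).1 hp) hiscomp.1
  by_cases hfull : (comp.length : Int) = (mxr - mnr + 1) * (mxc - mnc + 1)
  · rw [if_pos hfull] at hout
    obtain ⟨hsh, hdes⟩ := pvZeroFold g hpre C comp G hgd.1 hinb
    subst hout
    refine ⟨hsh, ?_⟩
    intro r c
    rw [hdes r c]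
    by_cases hw : ∃ p ∈ comp, C p ∧ p.1 = (r : Int) ∧ p.2 = (c : Int)
    · rw [if_pos hw]
      constructor
      · intro _; rfl
      · intro hno
        exfalso
        obtain ⟨p, hpm, hpc, hp1, hp2⟩ := hw
        have hpeq : p = ((r : Int), (c : Int)) := Prod.ext hp1 hp2
        apply hno
        constructor
        · rw [← hpeq]
          rw [pvComp_Z_iff g s comp hiscomp mnr mxr mnc mxc hmm p hpm]
          exact ⟨hfull, ((hC p hpm).1 hpc)⟩
        · right
          rw [← hpeq]
          exact (hchar p).1 hpm
    · rw [if_neg hw]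
      have hold := hgd.2 r c
      constructor
      · rintro ⟨hz, hmem⟩
        rcases hmem with hmem | hmem
        · exact hold.1 ⟨hz, hmem⟩
        · exfalso
          have hpm : ((r : Int), (c : Int)) ∈ comp := (hchar _).2 hmem
          apply hw
          refine ⟨((r : Int), (c : Int)), hpm, ?_, rfl, rfl⟩
          rw [hC _ hpm]
          exact ((pvComp_Z_iff g s comp hiscomp mnr mxr mnc mxc hmm _ hpm).1 hz).2
      · intro hno
        apply hold.2
        rintro ⟨hz, hmem⟩
        exact hno ⟨hz, Or.inl hmem⟩
  · rw [if_neg hfull] at hout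
    subst hout
    refine ⟨hgd.1, ?_⟩
    intro r c
    have hold := hgd.2 r c
    constructor
    · rintro ⟨hz, hmem⟩
      rcases hmem with hmem | hmem
      · exact hold.1 ⟨hz, hmem⟩
      · exfalso
        have hpm : ((r : Int), (c : Int)) ∈ comp := (hchar _).2 hmem
        exact pvComp_not_full_no_Z g s comp hiscomp mnr mxr mnc mxc hmm hfull _ hpm hz
    · intro hno
      apply hold.2
      rintro ⟨hz, hmem⟩
      exact hno ⟨hz, Or.inl hmem⟩

def pvAInv (g : List (List Int)) (done : List (Int × Int))
    (st : List (List Int) × List (List Bool)) : Prop :=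
  pvVis g st.2 (pvUSet g done) ∧ pvGDescr g st.1 (pvUSet g done)

theorem pvAstep_inv (g : List (List Int)) (hpre : Pre_transform g)
    (done : List (Int × Int)) (st : List (List Int) × List (List Bool)) (r c : Int)
    (hinv : pvAInv g done st) (hrc : pvInb g (r, c)) :
    pvAInv g (done ++ [(r, c)]) (pvAstep (pvH g) (pvW g) st r c) := by
  obtain ⟨hvis, hgd⟩ := hinv
  by_cases hguard : pvAget st.1 r c = 0 ∨ pvAgetB st.2 r c = true
  · have hstep : pvAstep (pvH g) (pvW g) st r c = st := by
      unfold pvAstep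
      rw [if_pos hguard]
    rw [hstep]
    by_cases hmem : (r, c) ∈ pvUSet g done
    · unfold pvAInv
      rw [pvUSet_append_mem g done (r, c) hmem]
      exact ⟨hvis, hgd⟩
    · have h0 : pvVal g (r, c) = 0 := by
        rcases hguard with h0 | h0
        · rw [← pvGDescr_read g st.1 _ hgd (r, c) hrc hmem]
          exact h0
        · exact absurd ((hvis.2.1 (r, c) hrc).1 h0) hmem
      unfold pvAInv
      rw [pvUSet_append_zero g done (r, c) h0]
      exact ⟨hvis, hgd⟩
  · push_neg at hguard
    obtain ⟨hne0, hnvis⟩ := hguard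
    have hmem : (r, c) ∉ pvUSet g done := fun hm => hnvis ((hvis.2.1 (r, c) hrc).2 hm)
    have hval : pvAget st.1 r c = pvVal g (r, c) := pvGDescr_read g st.1 _ hgd (r, c) hrc hmem
    have hnz : pvVal g (r, c) ≠ 0 := by rw [← hval]; exact hne0
    have hvis1 : pvVis g (pvAset st.2 r c true)
        (pvUSet g done ∪ {z | z ∈ ([] : List (Int × Int)) ++ [(r, c)]}) := by
      have h1 := pvVis_insert g st.2 _ hvis (r, c) hrc
      have heq2 : (pvUSet g done ∪ {((r, c) : Int × Int)}) =
          pvUSet g done ∪ {z | z ∈ ([] : List (Int × Int)) ++ [(r, c)]} := by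
        apply Set.ext
        intro y
        simp
      rw [heq2] at h1
      exact h1
    have hfuel : (pvCF g (r, c)).card ≤
        ((pvH g).toNat * (pvW g).toNat + 1) + ([] : List (Int × Int)).length := by
      have := pvCF_card_le g (r, c)
      simp only [List.length_nil, Nat.add_zero]
      omega
    obtain ⟨hndc, hchar, hvis2⟩ := pvBfs g st.1 (pvUSet g done) (r, c) (pvAget st.1 r c) hval
      (fun p hp hnp => pvGDescr_read g st.1 _ hgd p hp hnp)
      (pvUSet_disj g done (r, c) hmem) hrc hnz
      ((pvH g).toNat * (pvW g).toNat + 1) [(r, c)] [] (pvAset st.2 r c true)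
      (by simp)
      (fun x hx => by
        simp only [List.nil_append, List.mem_singleton] at hx
        subst hx
        exact Relation.ReflTransGen.refl)
      (by simp) hvis1 (by simp) hfuel
    have hstep : pvAstep (pvH g) (pvW g) st r c =
        (pvAhollow st.1
          (pvAbfs st.1 (pvH g) (pvW g) (pvAget st.1 r c)
            ((pvH g).toNat * (pvW g).toNat + 1) [(r, c)] (pvAset st.2 r c true) []).1,
         (pvAbfs st.1 (pvH g) (pvW g) (pvAget st.1 r c)
            ((pvH g).toNat * (pvW g).toNat + 1) [(r, c)] (pvAset st.2 r c true) []).2) := by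
      unfold pvAstep
      rw [if_neg (by push_neg; exact ⟨hne0, hnvis⟩)]
    rw [hstep]
    have hiscomp : pvIsComp g (r, c)
        (pvAbfs st.1 (pvH g) (pvW g) (pvAget st.1 r c)
          ((pvH g).toNat * (pvW g).toNat + 1) [(r, c)] (pvAset st.2 r c true) []).1 :=
      ⟨hrc, hnz, hndc, hchar⟩
    have hne : (pvAbfs st.1 (pvH g) (pvW g) (pvAget st.1 r c)
        ((pvH g).toNat * (pvW g).toNat + 1) [(r, c)] (pvAset st.2 r c true) []).1 ≠ [] :=
      List.ne_nil_of_mem ((hchar (r, c)).2 Relation.ReflTransGen.refl)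
    have hmm := pvMM_of_ports _ hne
    constructor
    · show pvVis g _ (pvUSet g (done ++ [(r, c)]))
      rw [pvUSet_append_new g done (r, c) hrc hnz]
      exact hvis2
    · show pvGDescr g _ (pvUSet g (done ++ [(r, c)]))
      rw [pvUSet_append_new g done (r, c) hrc hnz]
      exact pvHollow_core g hpre (r, c) _ hiscomp st.1 (pvUSet g done) hgd
        _ _ _ _ hmm _ (fun q hq => pvA_cond_iff _ _ _ _ _ hmm q hq) _ (by unfold pvAhollow; rfl)

theorem pvAfold (g : List (List Int)) (hpre : Pre_transform g) :
    ∀ (cells : List (Int × Int)), (∀ p ∈ cells, pvInb g p) →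
    ∀ (done : List (Int × Int)) (st : List (List Int) × List (List Bool)), pvAInv g done st →
    pvAInv g (done ++ cells)
      (cells.foldl (fun st (p : Int × Int) => pvAstep (pvH g) (pvW g) st p.1 p.2) st) := by
  intro cells
  induction cells with
  | nil =>
      intro _ done st h
      simpa using h
  | cons p rest ih =>
      intro hin done st h
      obtain ⟨a, b⟩ := p
      rw [List.foldl_cons]
      have h1 := pvAstep_inv g hpre done st a b h (hin (a, b) (by simp))
      have h2 := ih (fun q hq => hin q (by simp [hq])) (done ++ [(a, b)]) _ h1
      have heq3 : done ++ (a, b) :: rest = (done ++ [(a, b)]) ++ rest := by simp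
      rw [heq3]
      exact h2

theorem pvA_descr (g : List (List Int)) (hpre : Pre_transform g) : pvDescr g (transform g) := by
  have htr : transform g =
      ((pvCells g).foldl (fun st (p : Int × Int) => pvAstep (pvH g) (pvW g) st p.1 p.2)
        (g, List.replicate g.length (List.replicate (pvW g).toNat false))).1 := by
    unfold transform
    simp only [pvWif]
    rw [pvNest_foldl]
    rfl
  rw [htr]
  have hinit : pvAInv g [] (g, List.replicate g.length (List.replicate (pvW g).toNat false)) := by
    constructor
    · have h0 := pvVis_init g
      have hU0 : pvUSet g [] = (∅ : Set (Int × Int)) := by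
        apply Set.ext
        intro q
        unfold pvUSet
        simp
      show pvVis g _ (pvUSet g [])
      rw [hU0]
      exact h0
    · refine ⟨⟨rfl, fun r => rfl⟩, ?_⟩
      intro r c
      constructor
      · rintro ⟨_, hm⟩
        exact absurd hm (by unfold pvUSet; simp)
      · intro _
        rfl
  have hfin := pvAfold g hpre (pvCells g) (fun p hp => (pvMem_cells g p).1 hp) [] _ hinit
  rw [List.nil_append] at hfin
  obtain ⟨hvisF, hgdF⟩ := hfin
  refine ⟨hgdF.1.1, fun r => hgdF.1.2 r, ?_⟩
  intro r c
  constructor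
  · intro hz
    have hq := pvZ_inb g ((r : Int), (c : Int)) hz
    have hmem : ((r : Int), (c : Int)) ∈ pvUSet g (pvCells g) :=
      ⟨((r : Int), (c : Int)), (pvMem_cells g _).2 hq.1, hq.2, hq.1, Relation.ReflTransGen.refl⟩
    exact (hgdF.2 r c).1 ⟨hz, hmem⟩
  · intro hz
    exact (hgdF.2 r c).2 (by rintro ⟨hzz, _⟩; exact hz hzz)

-- ---------- Stage 6: union-find (B side): forests, find, union ----------

def pvN (g : List (List Int)) : ℕ := ((pvH g) * (pvW g)).toNat

def pvIdx (g : List (List Int)) (p : Int × Int) : Int := p.1 * pvW g + p.2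

theorem pvIdx_range (g : List (List Int)) (p : Int × Int) (hp : pvInb g p) :
    0 ≤ pvIdx g p ∧ pvIdx g p < (pvN g : Int) := by
  obtain ⟨h1, h2, h3, h4⟩ := hp
  have hW : (0 : Int) ≤ pvW g := by omega
  have hmul : (p.1 + 1) * pvW g ≤ pvH g * pvW g :=
    mul_le_mul_of_nonneg_right (by omega) hW
  have hexp : (p.1 + 1) * pvW g = p.1 * pvW g + pvW g := by ring
  have hlow : 0 ≤ p.1 * pvW g := mul_nonneg h1 hW
  have hN : ((pvN g : ℕ) : Int) = pvH g * pvW g := by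
    have : (0 : Int) ≤ pvH g * pvW g := mul_nonneg (by unfold pvH; omega) hW
    unfold pvN
    omega
  unfold pvIdx
  omega

theorem pvIdx_inj (g : List (List Int)) (p q : Int × Int) (hp : pvInb g p) (hq : pvInb g q)
    (h : pvIdx g p = pvIdx g q) : p = q := by
  obtain ⟨a1, a2, a3, a4⟩ := hp
  obtain ⟨b1, b2, b3, b4⟩ := hq
  unfold pvIdx at h
  have hr : p.1 = q.1 := by
    rcases lt_trichotomy p.1 q.1 with hlt | heq | hgt
    · exfalso
      have h1 : (1 : Int) * pvW g ≤ (q.1 - p.1) * pvW g :=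
        mul_le_mul_of_nonneg_right (by omega) (by omega)
      have h1' : pvW g ≤ (q.1 - p.1) * pvW g := by
        rw [one_mul] at h1
        exact h1
      have h3 : (q.1 - p.1) * pvW g = q.1 * pvW g - p.1 * pvW g := by ring
      omega
    · exact heq
    · exfalso
      have h1 : (1 : Int) * pvW g ≤ (p.1 - q.1) * pvW g :=
        mul_le_mul_of_nonneg_right (by omega) (by omega)
      have h1' : pvW g ≤ (p.1 - q.1) * pvW g := by
        rw [one_mul] at h1
        exact h1
      have h3 : (p.1 - q.1) * pvW g = p.1 * pvW g - q.1 * pvW g := by ring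
      omega
  have hc : p.2 = q.2 := by
    rw [hr] at h
    omega
  exact Prod.ext hr hc

def pvPstep (parent : List Int) (i : Int) : Int := parent.getD i.toNat 0

def pvIter (parent : List Int) : ℕ → Int → Int
  | 0, i => i
  | k + 1, i => pvIter parent k (pvPstep parent i)

def pvIsRoot (parent : List Int) (i : Int) : Prop := pvPstep parent i = i

def pvInR (parent : List Int) (i : Int) : Prop := 0 ≤ i ∧ i < (parent.length : Int)

def pvParOk (parent : List Int) : Prop :=
  ∀ i : Int, pvInR parent i → pvInR parent (pvPstep parent i)

def pvTerm (parent : List Int) : Prop :=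
  ∀ i : Int, pvInR parent i → ∃ k : ℕ, pvIsRoot parent (pvIter parent k i)

theorem pvIter_add (parent : List Int) (k m : ℕ) (i : Int) :
    pvIter parent (k + m) i = pvIter parent m (pvIter parent k i) := by
  induction k generalizing i with
  | zero => rw [Nat.zero_add]; rfl
  | succ k ih =>
      have he : k + 1 + m = (k + m) + 1 := by omega
      rw [he]
      show pvIter parent (k + m) (pvPstep parent i) =
        pvIter parent m (pvIter parent k (pvPstep parent i))
      exact ih (pvPstep parent i)

theorem pvIter_of_root (parent : List Int) (k : ℕ) (i : Int) (h : pvIsRoot parent i) :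
    pvIter parent k i = i := by
  induction k with
  | zero => rfl
  | succ k ih =>
      show pvIter parent k (pvPstep parent i) = i
      rw [h]
      exact ih

theorem pvIter_inR (parent : List Int) (hok : pvParOk parent) (k : ℕ) (i : Int)
    (hi : pvInR parent i) : pvInR parent (pvIter parent k i) := by
  induction k generalizing i with
  | zero => exact hi
  | succ k ih =>
      show pvInR parent (pvIter parent k (pvPstep parent i))
      exact ih _ (hok i hi)

theorem pvRoot_unique (parent : List Int) (k m : ℕ) (i : Int)
    (hk : pvIsRoot parent (pvIter parent k i)) (hm : pvIsRoot parent (pvIter parent m i)) :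
    pvIter parent k i = pvIter parent m i := by
  rcases le_total k m with h | h
  · obtain ⟨d, rfl⟩ := Nat.exists_eq_add_of_le h
    rw [pvIter_add, pvIter_of_root parent d _ hk]
  · obtain ⟨d, rfl⟩ := Nat.exists_eq_add_of_le h
    rw [pvIter_add, pvIter_of_root parent d _ hm]

-- a minimal chain to the root, and its distinctness
theorem pvMinChain (parent : List Int) (i : Int) (h : ∃ k : ℕ, pvIsRoot parent (pvIter parent k i)) :
    ∃ k : ℕ, pvIsRoot parent (pvIter parent k i) ∧ (∀ t, t < k → ¬ pvIsRoot parent (pvIter parent t i)) := by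
  classical
  exact ⟨Nat.find h, Nat.find_spec h, fun t ht => Nat.find_min h ht⟩

theorem pvMinChain_nodup (parent : List Int) (i : Int) (k : ℕ)
    (hroot : pvIsRoot parent (pvIter parent k i))
    (hmin : ∀ t, t < k → ¬ pvIsRoot parent (pvIter parent t i)) :
    ((List.range (k + 1)).map (fun t => pvIter parent t i)).Nodup := by
  rw [List.nodup_map_iff_inj_on List.nodup_range]
  intro a ha b hb heq
  rw [List.mem_range] at ha hb
  by_contra hne
  rcases Nat.lt_or_ge a b with hab | hab
  · have hb' : b ≤ k := by omega
    have hkey : pvIter parent (a + (k - b)) i = pvIter parent k i := by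
      rw [pvIter_add parent a (k - b) i, heq, ← pvIter_add parent b (k - b) i]
      congr 1
      omega
    have hlt : a + (k - b) < k := by omega
    exact hmin _ hlt (by rw [hkey]; exact hroot)
  · have hba : b < a := by omega
    have ha' : a ≤ k := by omega
    have hkey : pvIter parent (b + (k - a)) i = pvIter parent k i := by
      rw [pvIter_add parent b (k - a) i, ← heq, ← pvIter_add parent a (k - a) i]
      congr 1
      omega
    have hlt : b + (k - a) < k := by omega
    exact hmin _ hlt (by rw [hkey]; exact hroot)

theorem pvIntNodup_le (l : List Int) (n : ℕ) (hnd : l.Nodup)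
    (h : ∀ x ∈ l, 0 ≤ x ∧ x < (n : Int)) : l.length ≤ n := by
  classical
  have hsub : l.toFinset ⊆ Finset.Icc (0 : Int) ((n : Int) - 1) := by
    intro x hx
    rw [Finset.mem_Icc]
    have := h x (List.mem_toFinset.1 hx)
    omega
  have hc := Finset.card_le_card hsub
  rw [List.toFinset_card_of_nodup hnd, Int.card_Icc] at hc
  omega

theorem pvChain_le (parent : List Int) (hok : pvParOk parent) (i : Int) (hi : pvInR parent i)
    (k : ℕ) (hroot : pvIsRoot parent (pvIter parent k i))
    (hmin : ∀ t, t < k → ¬ pvIsRoot parent (pvIter parent t i)) :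
    k + 1 ≤ parent.length := by
  have hnd := pvMinChain_nodup parent i k hroot hmin
  have := pvIntNodup_le _ parent.length hnd
    (fun x hx => by
      rw [List.mem_map] at hx
      obtain ⟨t, _, rfl⟩ := hx
      exact pvIter_inR parent hok t i hi)
  simpa using this

theorem pvBroot_eq_of_root (parent : List Int) (fuel k : ℕ) (i : Int) (hk : k ≤ fuel)
    (hroot : pvIsRoot parent (pvIter parent k i)) :
    pvBroot parent fuel i = pvIter parent k i := by
  induction fuel generalizing i k with
  | zero =>
      have hk0 : k = 0 := by omega
      subst hk0
      rfl
  | succ fuel ih =>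
      have hun : pvBroot parent (fuel + 1) i =
          if parent.getD i.toNat 0 = i then i
          else pvBroot parent fuel (parent.getD i.toNat 0) := rfl
      rw [hun]
      by_cases hri : parent.getD i.toNat 0 = i
      · rw [if_pos hri, pvIter_of_root parent k i hri]
      · rw [if_neg hri]
        cases k with
        | zero => exact absurd hroot hri
        | succ k => exact ih k (pvPstep parent i) (by omega) hroot

theorem pvFind_eval (parent : List Int) (hok : pvParOk parent) (i : Int) (hi : pvInR parent i)
    (k : ℕ) (hroot : pvIsRoot parent (pvIter parent k i))
    (hmin : ∀ t, t < k → ¬ pvIsRoot parent (pvIter parent t i)) :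
    pvBfind parent i = pvIter parent k i :=
  pvBroot_eq_of_root parent parent.length k i
    (by have := pvChain_le parent hok i hi k hroot hmin; omega) hroot

theorem pvFind_spec (parent : List Int) (hok : pvParOk parent) (hterm : pvTerm parent)
    (i : Int) (hi : pvInR parent i) :
    (∃ k : ℕ, pvBfind parent i = pvIter parent k i) ∧ pvIsRoot parent (pvBfind parent i) ∧
      pvInR parent (pvBfind parent i) := by
  obtain ⟨k, hroot, hmin⟩ := pvMinChain parent i (hterm i hi)
  have heq := pvFind_eval parent hok i hi k hroot hmin
  exact ⟨⟨k, heq⟩, by rw [heq]; exact hroot, by rw [heq]; exact pvIter_inR parent hok k i hi⟩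

theorem pvFind_of_root (parent : List Int) (i : Int) (h : pvIsRoot parent i) :
    pvBfind parent i = i :=
  pvBroot_eq_of_root parent parent.length 0 i (by omega) h

theorem pvFind_iter (parent : List Int) (hok : pvParOk parent) (hterm : pvTerm parent)
    (i : Int) (hi : pvInR parent i) (k : ℕ) :
    pvBfind parent (pvIter parent k i) = pvBfind parent i := by
  obtain ⟨⟨m, hm⟩, hroot, _⟩ := pvFind_spec parent hok hterm i hi
  obtain ⟨⟨m2, hm2⟩, hroot2, _⟩ :=
    pvFind_spec parent hok hterm (pvIter parent k i) (pvIter_inR parent hok k i hi)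
  rw [hm2, ← pvIter_add]
  rw [hm2, ← pvIter_add] at hroot2
  rw [hm] at hroot
  rw [hm]
  exact pvRoot_unique parent (k + m2) m i hroot2 hroot

theorem pvReparent (parent : List Int) (hok : pvParOk parent) (hterm : pvTerm parent)
    (u v : Int) (hu : pvInR parent u) (hv : pvInR parent v)
    (hur : pvIsRoot parent u) (hvr : pvIsRoot parent v) (huv : u ≠ v) :
    pvParOk (parent.set u.toNat v) ∧ pvTerm (parent.set u.toNat v) ∧
    (∀ i, pvInR parent i → pvBfind (parent.set u.toNat v) i =
      if pvBfind parent i = u then v else pvBfind parent i) := by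
  have hlen : (parent.set u.toNat v).length = parent.length := List.length_set ..
  have hstep' : ∀ i : Int, pvInR parent i →
      pvPstep (parent.set u.toNat v) i = if i = u then v else pvPstep parent i := by
    intro i hi
    unfold pvPstep
    rw [pvGetD_set]
    by_cases he : i = u
    · subst he
      rw [if_pos ⟨rfl, by obtain ⟨h1, h2⟩ := hi; omega⟩, if_pos rfl]
    · rw [if_neg (fun hh => he (by obtain ⟨h1, _⟩ := hi; obtain ⟨h3, _⟩ := hu; omega)),
        if_neg he]
  have htrans : ∀ (k : ℕ) (i : Int), pvInR parent i →
      (∀ t, t < k → pvIter parent t i ≠ u) →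
      pvIter (parent.set u.toNat v) k i = pvIter parent k i := by
    intro k
    induction k with
    | zero => intro i _ _; rfl
    | succ k ih =>
        intro i hi hne
        show pvIter _ k (pvPstep (parent.set u.toNat v) i) = pvIter parent k (pvPstep parent i)
        have hi0 : i ≠ u := hne 0 (by omega)
        rw [hstep' i hi, if_neg hi0]
        exact ih (pvPstep parent i) (hok i hi) (fun t ht => hne (t + 1) (by omega))
  have hfindne : ∀ i : Int, pvInR parent i → pvBfind parent i ≠ u →
      ∀ t : ℕ, pvIter parent t i ≠ u := by
    intro i hi hne t heq
    apply hne
    rw [← pvFind_iter parent hok hterm i hi t, heq]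
    exact pvFind_of_root parent u hur
  have hOk' : pvParOk (parent.set u.toNat v) := by
    intro i hi
    rw [pvInR, hlen] at hi
    have hi' : pvInR parent i := hi
    rw [pvInR, hlen]
    rw [hstep' i hi']
    by_cases he : i = u
    · rw [if_pos he]; exact hv
    · rw [if_neg he]; exact hok i hi'
  -- the central computation: the new find values, with explicit chains
  have hmain : ∀ i, pvInR parent i →
      (pvBfind (parent.set u.toNat v) i =
        if pvBfind parent i = u then v else pvBfind parent i) ∧
      (∃ k, pvIsRoot (parent.set u.toNat v) (pvIter (parent.set u.toNat v) k i)) := by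
    intro i hi
    obtain ⟨k, hroot, hmin⟩ := pvMinChain parent i (hterm i hi)
    have hfind := pvFind_eval parent hok i hi k hroot hmin
    have hkle := pvChain_le parent hok i hi k hroot hmin
    by_cases hfi : pvBfind parent i = u
    · -- chain: i → … → u (k steps, avoiding u before the end), then u → v
      have hku : pvIter parent k i = u := by rw [← hfind, hfi]
      have hmid : ∀ t, t < k → pvIter parent t i ≠ u := by
        intro t ht heq
        exact hmin t ht (by rw [heq]; exact hur)
      have hck : pvIter (parent.set u.toNat v) k i = u := by
        rw [htrans k i hi hmid, hku]
      have hnx : pvIter (parent.set u.toNat v) (k + 1) i = v := by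
        rw [pvIter_add (parent.set u.toNat v) k 1 i, hck]
        show pvPstep (parent.set u.toNat v) u = v
        rw [hstep' u hu, if_pos rfl]
      have hvroot' : pvIsRoot (parent.set u.toNat v) v := by
        show pvPstep (parent.set u.toNat v) v = v
        rw [hstep' v hv, if_neg (Ne.symm huv)]
        exact hvr
      have hroot' : pvIsRoot (parent.set u.toNat v) (pvIter (parent.set u.toNat v) (k + 1) i) := by
        rw [hnx]; exact hvroot'
      refine ⟨?_, ⟨k + 1, hroot'⟩⟩
      rw [if_pos hfi]
      -- need fuel bound: k + 2 distinct in-range values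
      have hvnotchain : ∀ t, t ≤ k → pvIter parent t i ≠ v := by
        intro t ht heq
        have h1 : pvBfind parent (pvIter parent t i) = pvBfind parent i :=
          pvFind_iter parent hok hterm i hi t
        rw [heq, pvFind_of_root parent v hvr, hfi] at h1
        exact huv h1.symm
      have hnd2 : (((List.range (k + 1)).map (fun t => pvIter parent t i)) ++ [v]).Nodup := by
        rw [List.nodup_append]
        refine ⟨pvMinChain_nodup parent i k hroot hmin, List.nodup_singleton v, ?_⟩
        intro a ha b hb
        rw [List.mem_singleton] at hb
        subst hb
        rw [List.mem_map] at ha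
        obtain ⟨t, htm, hteq⟩ := ha
        rw [List.mem_range] at htm
        exact fun heqav => hvnotchain t (by omega) (hteq.trans heqav)
      have hle2 : k + 2 ≤ parent.length := by
        have := pvIntNodup_le _ parent.length hnd2
          (fun x hx => by
            rw [List.mem_append] at hx
            rcases hx with hx | hx
            · rw [List.mem_map] at hx
              obtain ⟨t, _, rfl⟩ := hx
              exact pvIter_inR parent hok t i hi
            · rw [List.mem_singleton] at hx
              subst hx
              exact hv)
        simpa using this
      have := pvBroot_eq_of_root (parent.set u.toNat v) (parent.set u.toNat v).length (k + 1) i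
        (by rw [hlen]; omega) hroot'
      rw [pvBfind, this, hnx]
    · -- untouched chain
      have hmid := hfindne i hi hfi
      have hck : pvIter (parent.set u.toNat v) k i = pvIter parent k i :=
        htrans k i hi (fun t _ => hmid t)
      have hroot' : pvIsRoot (parent.set u.toNat v) (pvIter (parent.set u.toNat v) k i) := by
        rw [hck]
        show pvPstep (parent.set u.toNat v) (pvIter parent k i) = pvIter parent k i
        rw [hstep' (pvIter parent k i) (pvIter_inR parent hok k i hi), if_neg (by
          rw [← hfind]; exact hfi)]
        exact hroot
      refine ⟨?_, ⟨k, hroot'⟩⟩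
      rw [if_neg hfi]
      have := pvBroot_eq_of_root (parent.set u.toNat v) (parent.set u.toNat v).length k i
        (by rw [hlen]; omega) hroot'
      rw [pvBfind, this, hck, hfind]
  refine ⟨hOk', ?_, fun i hi => (hmain i hi).1⟩
  intro i hi
  rw [pvInR, hlen] at hi
  exact (hmain i hi).2

-- equivalence-closure bookkeeping
def pvEadd (E : Int → Int → Prop) (a b : Int) : Int → Int → Prop :=
  fun i j => E i j ∨ (i = a ∧ j = b)

theorem pvEqvGen_congr (E E' : Int → Int → Prop) (h : ∀ i j, E i j ↔ E' i j) (i j : Int) :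
    Relation.EqvGen E i j ↔ Relation.EqvGen E' i j :=
  ⟨Relation.EqvGen.mono (fun a b hab => (h a b).1 hab),
   Relation.EqvGen.mono (fun a b hab => (h a b).2 hab)⟩

theorem pvEqvGen_empty (i j : Int) :
    Relation.EqvGen (fun _ _ => False) i j ↔ i = j := by
  constructor
  · intro h
    induction h with
    | rel _ _ h => exact absurd h id
    | refl => rfl
    | symm _ _ _ ih => exact ih.symm
    | trans _ _ _ _ _ ih1 ih2 => exact ih1.trans ih2
  · rintro rfl
    exact Relation.EqvGen.refl i

theorem pvEG_trans {E : Int → Int → Prop} {x y z : Int} (h1 : Relation.EqvGen E x y)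
    (h2 : Relation.EqvGen E y z) : Relation.EqvGen E x z :=
  Relation.EqvGen.trans x y z h1 h2

theorem pvEG_symm {E : Int → Int → Prop} {x y : Int} (h : Relation.EqvGen E x y) :
    Relation.EqvGen E y x :=
  Relation.EqvGen.symm x y h

theorem pvEqvGen_add (E : Int → Int → Prop) (a b : Int) (i j : Int) :
    Relation.EqvGen (pvEadd E a b) i j ↔
      (Relation.EqvGen E i j ∨
       (Relation.EqvGen E i a ∧ Relation.EqvGen E b j) ∨
       (Relation.EqvGen E i b ∧ Relation.EqvGen E a j)) := by
  constructor
  · intro h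
    induction h with
    | rel x y hxy =>
        rcases hxy with hxy | ⟨rfl, rfl⟩
        · exact Or.inl (Relation.EqvGen.rel _ _ hxy)
        · exact Or.inr (Or.inl ⟨Relation.EqvGen.refl _, Relation.EqvGen.refl _⟩)
    | refl => exact Or.inl (Relation.EqvGen.refl _)
    | symm x y _ ih =>
        rcases ih with h1 | ⟨h1, h2⟩ | ⟨h1, h2⟩
        · exact Or.inl (pvEG_symm h1)
        · exact Or.inr (Or.inr ⟨pvEG_symm h2, pvEG_symm h1⟩)
        · exact Or.inr (Or.inl ⟨pvEG_symm h2, pvEG_symm h1⟩)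
    | trans x y z _ _ ih1 ih2 =>
        rcases ih1 with h1 | ⟨h1, h2⟩ | ⟨h1, h2⟩ <;>
          rcases ih2 with h3 | ⟨h3, h4⟩ | ⟨h3, h4⟩
        · exact Or.inl (pvEG_trans h1 h3)
        · exact Or.inr (Or.inl ⟨pvEG_trans h1 h3, h4⟩)
        · exact Or.inr (Or.inr ⟨pvEG_trans h1 h3, h4⟩)
        · exact Or.inr (Or.inl ⟨h1, pvEG_trans h2 h3⟩)
        · exact Or.inl (pvEG_trans h1 (pvEG_trans (pvEG_symm h3) (pvEG_trans (pvEG_symm h2) h4)))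
        · exact Or.inl (pvEG_trans h1 h4)
        · exact Or.inr (Or.inr ⟨h1, pvEG_trans h2 h3⟩)
        · exact Or.inl (pvEG_trans h1 h4)
        · exact Or.inl (pvEG_trans h1 (pvEG_trans (pvEG_symm h3) (pvEG_trans (pvEG_symm h2) h4)))
  · intro h
    have hmono : ∀ x y, Relation.EqvGen E x y → Relation.EqvGen (pvEadd E a b) x y :=
      fun x y => Relation.EqvGen.mono (fun p q hpq => Or.inl hpq)
    have hab : Relation.EqvGen (pvEadd E a b) a b :=
      Relation.EqvGen.rel _ _ (Or.inr ⟨rfl, rfl⟩)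
    rcases h with h1 | ⟨h1, h2⟩ | ⟨h1, h2⟩
    · exact hmono _ _ h1
    · exact pvEG_trans (pvEG_trans (hmono _ _ h1) hab) (hmono _ _ h2)
    · exact pvEG_trans (pvEG_trans (hmono _ _ h1) (pvEG_symm hab)) (hmono _ _ h2)

theorem pvEqvGen_redundant (E : Int → Int → Prop) (a b : Int)
    (hab : Relation.EqvGen E a b) (i j : Int) :
    Relation.EqvGen (pvEadd E a b) i j ↔ Relation.EqvGen E i j := by
  rw [pvEqvGen_add]
  constructor
  · rintro (h | ⟨h1, h2⟩ | ⟨h1, h2⟩)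
    · exact h
    · exact pvEG_trans (pvEG_trans h1 hab) h2
    · exact pvEG_trans (pvEG_trans h1 (pvEG_symm hab)) h2
  · exact Or.inl

def pvUF (g : List (List Int)) (parent : List Int) (E : Int → Int → Prop) : Prop :=
  parent.length = pvN g ∧ pvParOk parent ∧ pvTerm parent ∧
  ∀ i j : Int, 0 ≤ i → i < (pvN g : Int) → 0 ≤ j → j < (pvN g : Int) →
    (pvBfind parent i = pvBfind parent j ↔ Relation.EqvGen E i j)

theorem pvUnion_core (g : List (List Int)) (parent : List Int) (E : Int → Int → Prop)
    (hlen : parent.length = pvN g) (hok : pvParOk parent) (hterm : pvTerm parent)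
    (hsem : ∀ i j : Int, 0 ≤ i → i < (pvN g : Int) → 0 ≤ j → j < (pvN g : Int) →
      (pvBfind parent i = pvBfind parent j ↔ Relation.EqvGen E i j))
    (a b : Int) (ha : 0 ≤ a ∧ a < (pvN g : Int)) (hb : 0 ≤ b ∧ b < (pvN g : Int))
    (u v : Int)
    (hufind : u = pvBfind parent a ∧ v = pvBfind parent b)
    (hne : pvBfind parent a ≠ pvBfind parent b) :
    pvUF g (parent.set u.toNat v) (pvEadd E a b) := by
  have hinra : pvInR parent a := by unfold pvInR; rw [hlen]; exact ha
  have hinrb : pvInR parent b := by unfold pvInR; rw [hlen]; exact hb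
  obtain ⟨_, hroota, hinrfa⟩ := pvFind_spec parent hok hterm a hinra
  obtain ⟨_, hrootb, hinrfb⟩ := pvFind_spec parent hok hterm b hinrb
  obtain ⟨rfl, rfl⟩ := hufind
  obtain ⟨hok', hterm', hfindlaw⟩ := pvReparent parent hok hterm _ _ hinrfa hinrfb hroota hrootb hne
  refine ⟨by rw [List.length_set]; exact hlen, hok', hterm', ?_⟩
  intro i j hi0 hi1 hj0 hj1
  have hinri : pvInR parent i := by unfold pvInR; rw [hlen]; exact ⟨hi0, hi1⟩
  have hinrj : pvInR parent j := by unfold pvInR; rw [hlen]; exact ⟨hj0, hj1⟩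
  rw [hfindlaw i hinri, hfindlaw j hinrj, pvEqvGen_add,
    ← hsem i j hi0 hi1 hj0 hj1, ← hsem i a hi0 hi1 ha.1 ha.2,
    ← hsem b j hb.1 hb.2 hj0 hj1, ← hsem i b hi0 hi1 hb.1 hb.2,
    ← hsem a j ha.1 ha.2 hj0 hj1]
  split_ifs with h1 h2 h2 <;> omega

theorem pvBunion_UF (g : List (List Int)) (parent : List Int) (E : Int → Int → Prop)
    (huf : pvUF g parent E) (a b : Int)
    (ha : 0 ≤ a ∧ a < (pvN g : Int)) (hb : 0 ≤ b ∧ b < (pvN g : Int)) :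
    pvUF g (pvBunion parent a b) (pvEadd E a b) := by
  obtain ⟨hlen, hok, hterm, hsem⟩ := huf
  by_cases heq : pvBfind parent a = pvBfind parent b
  · have hun : pvBunion parent a b = parent := by
      simp only [pvBunion]
      rw [if_pos heq]
    rw [hun]
    have hab : Relation.EqvGen E a b := (hsem a b ha.1 ha.2 hb.1 hb.2).1 heq
    exact ⟨hlen, hok, hterm, fun i j hi0 hi1 hj0 hj1 => by
      rw [pvEqvGen_redundant E a b hab]
      exact hsem i j hi0 hi1 hj0 hj1⟩
  · have hun : pvBunion parent a b = parent.set (pvBfind parent a).toNat (pvBfind parent b) := by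
      simp only [pvBunion]
      rw [if_neg heq]
    rw [hun]
    exact pvUnion_core g parent E hlen hok hterm hsem a b ha hb _ _ ⟨rfl, rfl⟩ heq

theorem pvUF_init (g : List (List Int)) :
    pvUF g (PySem.List.pyRange 0 (pvH g * pvW g) 1) (fun _ _ => False) := by
  have hHW : (0 : Int) ≤ pvH g * pvW g :=
    mul_nonneg (by unfold pvH; omega) (by unfold pvW; omega)
  have hlen : (PySem.List.pyRange 0 (pvH g * pvW g) 1).length = pvN g := by
    rw [PySem.List.length_pyRange_one]
    unfold pvN
    omega
  have hstep : ∀ i : Int, pvInR (PySem.List.pyRange 0 (pvH g * pvW g) 1) i →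
      pvPstep (PySem.List.pyRange 0 (pvH g * pvW g) 1) i = i := by
    intro i hi
    obtain ⟨h0, h1⟩ := hi
    unfold pvPstep
    have hlt : i.toNat < (PySem.List.pyRange 0 (pvH g * pvW g) 1).length := by omega
    rw [List.getD_eq_getElem _ 0 hlt, PySem.List.getElem_pyRange_one]
    omega
  refine ⟨hlen, ?_, ?_, ?_⟩
  · intro i hi
    rw [hstep i hi]
    exact hi
  · intro i hi
    exact ⟨0, hstep i hi⟩
  · intro i j hi0 hi1 hj0 hj1
    have hi : pvInR (PySem.List.pyRange 0 (pvH g * pvW g) 1) i := by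
      unfold pvInR
      rw [hlen]
      exact ⟨hi0, hi1⟩
    have hj : pvInR (PySem.List.pyRange 0 (pvH g * pvW g) 1) j := by
      unfold pvInR
      rw [hlen]
      exact ⟨hj0, hj1⟩
    rw [pvFind_of_root _ i (hstep i hi), pvFind_of_root _ j (hstep j hj), pvEqvGen_empty]

-- the union pairs recorded after processing the cells of `done`
def pvEdone (g : List (List Int)) (done : List (Int × Int)) : Int → Int → Prop :=
  fun i j => ∃ p ∈ done, pvVal g p ≠ 0 ∧ pvInb g p ∧
    ((p.2 + 1 < pvW g ∧ pvVal g (p.1, p.2 + 1) = pvVal g p ∧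
        i = pvIdx g p ∧ j = pvIdx g p + 1) ∨
     (p.1 + 1 < pvH g ∧ pvVal g (p.1 + 1, p.2) = pvVal g p ∧
        i = pvIdx g p ∧ j = pvIdx g p + pvW g))

theorem pvEdone_append (g : List (List Int)) (done : List (Int × Int)) (r c : Int)
    (hinb : pvInb g (r, c)) (hnz : pvVal g (r, c) ≠ 0) (i j : Int) :
    pvEdone g (done ++ [(r, c)]) i j ↔
      (pvEdone g done i j ∨
       ((c + 1 < pvW g ∧ pvVal g (r, c + 1) = pvVal g (r, c)) ∧
         i = pvIdx g (r, c) ∧ j = pvIdx g (r, c) + 1) ∨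
       ((r + 1 < pvH g ∧ pvVal g (r + 1, c) = pvVal g (r, c)) ∧
         i = pvIdx g (r, c) ∧ j = pvIdx g (r, c) + pvW g)) := by
  unfold pvEdone
  constructor
  · rintro ⟨p, hp, hnzp, hinbp, hcase⟩
    rcases List.mem_append.1 hp with hp' | hp'
    · exact Or.inl ⟨p, hp', hnzp, hinbp, hcase⟩
    · have hpe : p = (r, c) := by simpa using hp'
      subst hpe
      rcases hcase with ⟨g1, g2, g3, g4⟩ | ⟨g1, g2, g3, g4⟩
      · exact Or.inr (Or.inl ⟨⟨g1, g2⟩, g3, g4⟩)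
      · exact Or.inr (Or.inr ⟨⟨g1, g2⟩, g3, g4⟩)
  · rintro (⟨p, hp, hnzp, hinbp, hcase⟩ | ⟨⟨g1, g2⟩, g3, g4⟩ | ⟨⟨g1, g2⟩, g3, g4⟩)
    · exact ⟨p, List.mem_append.2 (Or.inl hp), hnzp, hinbp, hcase⟩
    · exact ⟨(r, c), List.mem_append.2 (Or.inr (by simp)), hnz, hinb,
        Or.inl ⟨g1, g2, g3, g4⟩⟩
    · exact ⟨(r, c), List.mem_append.2 (Or.inr (by simp)), hnz, hinb,
        Or.inr ⟨g1, g2, g3, g4⟩⟩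

theorem pvEdone_append_zero (g : List (List Int)) (done : List (Int × Int)) (r c : Int)
    (hz : pvVal g (r, c) = 0) (i j : Int) :
    pvEdone g (done ++ [(r, c)]) i j ↔ pvEdone g done i j := by
  unfold pvEdone
  constructor
  · rintro ⟨p, hp, hnzp, hinbp, hcase⟩
    rcases List.mem_append.1 hp with hp' | hp'
    · exact ⟨p, hp', hnzp, hinbp, hcase⟩
    · have hpe : p = (r, c) := by simpa using hp'
      subst hpe
      exact absurd hz hnzp
  · rintro ⟨p, hp, hnzp, hinbp, hcase⟩
    exact ⟨p, List.mem_append.2 (Or.inl hp), hnzp, hinbp, hcase⟩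

theorem pvBlink_UF (g : List (List Int)) (parent : List Int)
    (done : List (Int × Int)) (r c : Int) (hinb : pvInb g (r, c))
    (huf : pvUF g parent (pvEdone g done)) :
    pvUF g (pvBlink g (pvH g) (pvW g) parent r c) (pvEdone g (done ++ [(r, c)])) := by
  have hcell : pvBlink g (pvH g) (pvW g) parent r c =
      (if pvVal g (r, c) = 0 then parent
       else
        let p1 := if c + 1 < pvW g ∧ pvVal g (r, c + 1) = pvVal g (r, c) then
            pvBunion parent (pvIdx g (r, c)) (pvIdx g (r, c) + 1) else parent
        if r + 1 < pvH g ∧ pvVal g (r + 1, c) = pvVal g (r, c) then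
            pvBunion p1 (pvIdx g (r, c)) (pvIdx g (r, c) + pvW g) else p1) := rfl
  rw [hcell]
  by_cases hv : pvVal g (r, c) = 0
  · rw [if_pos hv]
    obtain ⟨hlen, hok, hterm, hsem⟩ := huf
    exact ⟨hlen, hok, hterm, fun i j hi0 hi1 hj0 hj1 => by
      rw [pvEqvGen_congr _ _ (pvEdone_append_zero g done r c hv) i j]
      exact hsem i j hi0 hi1 hj0 hj1⟩
  · rw [if_neg hv]
    have hi := pvIdx_range g (r, c) hinb
    have hG1eq : pvIdx g (r, c) + 1 = pvIdx g (r, c + 1) := by unfold pvIdx; ring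
    have hG2eq : pvIdx g (r, c) + pvW g = pvIdx g (r + 1, c) := by unfold pvIdx; ring
    have hstep1 : pvUF g (if c + 1 < pvW g ∧ pvVal g (r, c + 1) = pvVal g (r, c) then
        pvBunion parent (pvIdx g (r, c)) (pvIdx g (r, c) + 1) else parent)
        (if c + 1 < pvW g ∧ pvVal g (r, c + 1) = pvVal g (r, c) then
          pvEadd (pvEdone g done) (pvIdx g (r, c)) (pvIdx g (r, c) + 1)
        else pvEdone g done) := by
      by_cases hg1 : c + 1 < pvW g ∧ pvVal g (r, c + 1) = pvVal g (r, c)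
      · rw [if_pos hg1, if_pos hg1]
        have hinb2 : pvInb g (r, c + 1) := by
          obtain ⟨a1, a2, a3, a4⟩ := hinb
          exact ⟨a1, a2, by omega, hg1.1⟩
        have hi2 := pvIdx_range g (r, c + 1) hinb2
        exact pvBunion_UF g parent _ huf _ _ hi (by rw [hG1eq]; exact hi2)
      · rw [if_neg hg1, if_neg hg1]
        exact huf
    by_cases hg2 : r + 1 < pvH g ∧ pvVal g (r + 1, c) = pvVal g (r, c)
    · rw [if_pos hg2]
      have hinb3 : pvInb g (r + 1, c) := by
        obtain ⟨a1, a2, a3, a4⟩ := hinb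
        exact ⟨by omega, hg2.1, a3, a4⟩
      have hi3 := pvIdx_range g (r + 1, c) hinb3
      have hstep2 := pvBunion_UF g _ _ hstep1 (pvIdx g (r, c)) (pvIdx g (r, c) + pvW g)
        hi (by rw [hG2eq]; exact hi3)
      obtain ⟨hlen, hok, hterm, hsem⟩ := hstep2
      refine ⟨hlen, hok, hterm, fun i j hi0 hi1 hj0 hj1 => ?_⟩
      rw [hsem i j hi0 hi1 hj0 hj1]
      apply pvEqvGen_congr
      intro x y
      rw [pvEdone_append g done r c hinb hv x y]
      unfold pvEadd
      by_cases hg1 : c + 1 < pvW g ∧ pvVal g (r, c + 1) = pvVal g (r, c)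
      · rw [if_pos hg1]
        constructor
        · rintro ((h | h) | h)
          · exact Or.inl h
          · exact Or.inr (Or.inl ⟨⟨hg1.1, hg1.2⟩, h⟩)
          · exact Or.inr (Or.inr ⟨⟨hg2.1, hg2.2⟩, h⟩)
        · rintro (h | ⟨_, h⟩ | ⟨_, h⟩)
          · exact Or.inl (Or.inl h)
          · exact Or.inl (Or.inr h)
          · exact Or.inr h
      · rw [if_neg hg1]
        constructor
        · rintro (h | h)
          · exact Or.inl h
          · exact Or.inr (Or.inr ⟨⟨hg2.1, hg2.2⟩, h⟩)
        · rintro (h | ⟨⟨hh1, hh2⟩, h⟩ | ⟨_, h⟩)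
          · exact Or.inl h
          · exact absurd ⟨hh1, hh2⟩ hg1
          · exact Or.inr h
    · rw [if_neg hg2]
      obtain ⟨hlen, hok, hterm, hsem⟩ := hstep1
      refine ⟨hlen, hok, hterm, fun i j hi0 hi1 hj0 hj1 => ?_⟩
      rw [hsem i j hi0 hi1 hj0 hj1]
      apply pvEqvGen_congr
      intro x y
      rw [pvEdone_append g done r c hinb hv x y]
      by_cases hg1 : c + 1 < pvW g ∧ pvVal g (r, c + 1) = pvVal g (r, c)
      · rw [if_pos hg1]
        unfold pvEadd
        constructor
        · rintro (h | h)
          · exact Or.inl h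
          · exact Or.inr (Or.inl ⟨⟨hg1.1, hg1.2⟩, h⟩)
        · rintro (h | ⟨_, h⟩ | ⟨⟨hh1, hh2⟩, h⟩)
          · exact Or.inl h
          · exact Or.inr h
          · exact absurd ⟨hh1, hh2⟩ hg2
      · rw [if_neg hg1]
        constructor
        · rintro h
          exact Or.inl h
        · rintro (h | ⟨⟨hh1, hh2⟩, h⟩ | ⟨⟨hh1, hh2⟩, h⟩)
          · exact h
          · exact absurd ⟨hh1, hh2⟩ hg1
          · exact absurd ⟨hh1, hh2⟩ hg2

theorem pvBfold_UF (g : List (List Int)) :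
    ∀ (cells : List (Int × Int)), (∀ p ∈ cells, pvInb g p) →
    ∀ (done : List (Int × Int)) (parent : List Int), pvUF g parent (pvEdone g done) →
    pvUF g (cells.foldl (fun P (p : Int × Int) => pvBlink g (pvH g) (pvW g) P p.1 p.2) parent)
      (pvEdone g (done ++ cells)) := by
  intro cells
  induction cells with
  | nil =>
      intro _ done parent h
      simpa using h
  | cons p rest ih =>
      intro hin done parent h
      obtain ⟨a, b⟩ := p
      rw [List.foldl_cons]
      have h1 := pvBlink_UF g parent done a b (hin (a, b) (by simp)) h
      have h2 := ih (fun q hq => hin q (by simp [hq])) (done ++ [(a, b)]) _ h1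
      have heq3 : done ++ (a, b) :: rest = (done ++ [(a, b)]) ++ rest := by simp
      rw [heq3]
      exact h2

-- ---------- Stage 7: B side — union-find classes are components ----------

def pvRD (g : List (List Int)) (p q : Int × Int) : Prop :=
  pvAdj g p q ∧ (q = (p.1, p.2 + 1) ∨ q = (p.1 + 1, p.2))

theorem pvEdone_cells (g : List (List Int)) (i j : Int) :
    pvEdone g (pvCells g) i j ↔
      ∃ p q : Int × Int, pvRD g p q ∧ i = pvIdx g p ∧ j = pvIdx g q := by
  unfold pvEdone pvRD
  constructor
  · rintro ⟨p, hp, hnzp, hinbp, hcase⟩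
    obtain ⟨i1, i2, i3, i4⟩ := hinbp
    rcases hcase with ⟨g1, g2, g3, g4⟩ | ⟨g1, g2, g3, g4⟩
    · refine ⟨p, (p.1, p.2 + 1), ⟨⟨⟨i1, i2, i3, i4⟩, ⟨i1, i2, by omega, g1⟩, hnzp, g2,
        Or.inr (Or.inr (Or.inl rfl))⟩, Or.inl rfl⟩, g3, ?_⟩
      rw [g4]
      unfold pvIdx
      simp only
      omega
    · refine ⟨p, (p.1 + 1, p.2), ⟨⟨⟨i1, i2, i3, i4⟩, ⟨by omega, g1, i3, i4⟩, hnzp, g2,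
        Or.inl rfl⟩, Or.inr rfl⟩, g3, ?_⟩
      rw [g4]
      unfold pvIdx
      simp only
      have hx : (p.1 + 1) * pvW g = p.1 * pvW g + pvW g := by ring
      omega
  · rintro ⟨p, q, ⟨hadj, hor⟩, hi, hj⟩
    refine ⟨p, (pvMem_cells g p).2 hadj.1, hadj.2.2.1, hadj.1, ?_⟩
    rcases hor with rfl | rfl
    · left
      refine ⟨hadj.2.1.2.2.2, hadj.2.2.2.1, hi, ?_⟩
      rw [hj]
      unfold pvIdx
      simp only
      ring
    · right
      refine ⟨hadj.2.1.2.1, hadj.2.2.2.1, hi, ?_⟩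
      rw [hj]
      unfold pvIdx
      simp only
      ring

theorem pvEqvGen_struct (g : List (List Int)) (i j : Int)
    (h : Relation.EqvGen (pvEdone g (pvCells g)) i j) :
    i = j ∨ ∃ p q : Int × Int, pvInb g p ∧ pvInb g q ∧ pvConn g p q ∧
      i = pvIdx g p ∧ j = pvIdx g q := by
  induction h with
  | rel x y hxy =>
      obtain ⟨p, q, ⟨hadj, _⟩, hi, hj⟩ := (pvEdone_cells g x y).1 hxy
      exact Or.inr ⟨p, q, hadj.1, hadj.2.1, Relation.ReflTransGen.single hadj, hi, hj⟩
  | refl => exact Or.inl rfl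
  | symm x y _ ih =>
      rcases ih with rfl | ⟨p, q, h1, h2, h3, h4, h5⟩
      · exact Or.inl rfl
      · exact Or.inr ⟨q, p, h2, h1, pvConn_symm g p q h3, h5, h4⟩
  | trans x y z _ _ ih1 ih2 =>
      rcases ih1 with rfl | ⟨p, q, a1, a2, a3, a4, a5⟩
      · exact ih2
      · rcases ih2 with rfl | ⟨p', q', b1, b2, b3, b4, b5⟩
        · exact Or.inr ⟨p, q, a1, a2, a3, a4, a5⟩
        · have hqq : q = p' := pvIdx_inj g q p' a2 b1 (by rw [← a5, ← b4])
          exact Or.inr ⟨p, q', a1, b2,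
            pvConn_trans g p q q' a3 (by rw [hqq]; exact b3), a4, b5⟩

theorem pvAdj_EqvGen (g : List (List Int)) (b c : Int × Int) (hadj : pvAdj g b c) :
    Relation.EqvGen (pvEdone g (pvCells g)) (pvIdx g b) (pvIdx g c) := by
  obtain ⟨hb, hc, hnz, hval, hoff⟩ := hadj
  rcases hoff with hoff | hoff | hoff | hoff
  · exact Relation.EqvGen.rel _ _ ((pvEdone_cells g _ _).2
      ⟨b, c, ⟨⟨hb, hc, hnz, hval, Or.inl hoff⟩, Or.inr hoff⟩, rfl, rfl⟩)
  · apply pvEG_symm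
    have hbe : b = (c.1 + 1, c.2) := by
      have h1 := congrArg Prod.fst hoff
      have h2 := congrArg Prod.snd hoff
      simp at h1 h2
      apply Prod.ext
      · show b.1 = c.1 + 1
        omega
      · show b.2 = c.2
        omega
    exact Relation.EqvGen.rel _ _ ((pvEdone_cells g _ _).2
      ⟨c, b, ⟨⟨hc, hb, by rw [hval]; exact hnz, hval.symm, Or.inl hbe⟩, Or.inr hbe⟩, rfl, rfl⟩)
  · exact Relation.EqvGen.rel _ _ ((pvEdone_cells g _ _).2
      ⟨b, c, ⟨⟨hb, hc, hnz, hval, Or.inr (Or.inr (Or.inl hoff))⟩, Or.inl hoff⟩, rfl, rfl⟩)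
  · apply pvEG_symm
    have hbe : b = (c.1, c.2 + 1) := by
      have h1 := congrArg Prod.fst hoff
      have h2 := congrArg Prod.snd hoff
      simp at h1 h2
      apply Prod.ext
      · show b.1 = c.1
        omega
      · show b.2 = c.2 + 1
        omega
    exact Relation.EqvGen.rel _ _ ((pvEdone_cells g _ _).2
      ⟨c, b, ⟨⟨hc, hb, by rw [hval]; exact hnz, hval.symm,
        Or.inr (Or.inr (Or.inl hbe))⟩, Or.inl hbe⟩, rfl, rfl⟩)

theorem pvConn_EqvGen (g : List (List Int)) (p q : Int × Int) (h : pvConn g p q) :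
    Relation.EqvGen (pvEdone g (pvCells g)) (pvIdx g p) (pvIdx g q) := by
  induction h with
  | refl => exact Relation.EqvGen.refl _
  | tail hc hadj ih => exact pvEG_trans ih (pvAdj_EqvGen g _ _ hadj)

theorem pvFind_conn (g : List (List Int)) (parent : List Int)
    (huf : pvUF g parent (pvEdone g (pvCells g)))
    (p q : Int × Int) (hp : pvInb g p) (hq : pvInb g q) :
    (pvBfind parent (pvIdx g p) = pvBfind parent (pvIdx g q)) ↔ pvConn g p q := by
  obtain ⟨_, _, _, hsem⟩ := huf
  have hip := pvIdx_range g p hp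
  have hiq := pvIdx_range g q hq
  rw [hsem _ _ hip.1 hip.2 hiq.1 hiq.2]
  constructor
  · intro h
    rcases pvEqvGen_struct g _ _ h with heq | ⟨p', q', h1, h2, h3, h4, h5⟩
    · rw [pvIdx_inj g p q hp hq heq]
      exact Relation.ReflTransGen.refl
    · have he1 : p = p' := pvIdx_inj g p p' hp h1 h4
      have he2 : q = q' := pvIdx_inj g q q' hq h2 h5
      rw [he1, he2]
      exact h3
  · exact pvConn_EqvGen g p q

theorem pvCells_nodup (g : List (List Int)) : (pvCells g).Nodup := by
  unfold pvCells
  rw [List.nodup_flatMap]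
  constructor
  · intro r _
    exact List.Nodup.map (fun c1 c2 hcc => by simpa using hcc) (PySem.List.nodup_pyRange_one 0 (pvW g))
  · apply List.Pairwise.imp ?_ (PySem.List.pairwise_lt_pyRange_one 0 (pvH g))
    intro r1 r2 hlt
    intro x hx1 hx2
    rw [List.mem_map] at hx1 hx2
    obtain ⟨c1, _, rfl⟩ := hx1
    obtain ⟨c2, _, he⟩ := hx2
    have := congrArg Prod.fst he
    simp only at this
    omega

-- the component list of root k among the processed cells (in cell order)
def pvLk (g : List (List Int)) (parent : List Int) (k : Int) (done : List (Int × Int)) :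
    List (Int × Int) :=
  done.filter (fun p => decide (pvVal g p ≠ 0) && (pvBfind parent (pvIdx g p) == k))

-- (mr, Mr, mc, Mc, n) describes comp
def pvAgg (comp : List (Int × Int)) (s : Int × Int × Int × Int × Int) : Prop :=
  pvMM comp s.1 s.2.1 s.2.2.1 s.2.2.2.1 ∧ s.2.2.2.2 = (comp.length : Int)

-- invariant of the stats pass
def pvStatsOK (g : List (List Int)) (parent : List Int) (done : List (Int × Int))
    (d : PySem.Dict Int (Int × Int × Int × Int × Int)) : Prop :=
  ∀ k : Int, match d.get? k with
    | none => pvLk g parent k done = []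
    | some s => pvLk g parent k done ≠ [] ∧ pvAgg (pvLk g parent k done) s

theorem pvLk_isComp (g : List (List Int)) (parent : List Int)
    (hufP : pvUF g parent (pvEdone g (pvCells g)))
    (x : Int × Int) (hx : pvInb g x) (hnz : pvVal g x ≠ 0) :
    pvIsComp g x (pvLk g parent (pvBfind parent (pvIdx g x)) (pvCells g)) ∧
      x ∈ pvLk g parent (pvBfind parent (pvIdx g x)) (pvCells g) := by
  have hchar : ∀ y, y ∈ pvLk g parent (pvBfind parent (pvIdx g x)) (pvCells g) ↔ pvConn g x y := by
    intro y
    unfold pvLk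
    rw [List.mem_filter, pvMem_cells]
    simp only [Bool.and_eq_true, decide_eq_true_eq, beq_iff_eq]
    constructor
    · rintro ⟨hinb, _, hfy⟩
      exact (pvFind_conn g parent hufP x y hx hinb).1 hfy.symm
    · intro hconn
      have hinb := pvConn_inb g x y hconn hx
      exact ⟨hinb, by rw [pvConn_val g x y hconn]; exact hnz,
        ((pvFind_conn g parent hufP x y hx hinb).2 hconn).symm⟩
  exact ⟨⟨hx, hnz, List.Nodup.filter _ (pvCells_nodup g), hchar⟩,
    (hchar x).2 Relation.ReflTransGen.refl⟩

-- appending one cell to the filtered component lists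
theorem pvLk_append (g : List (List Int)) (parent : List Int) (k : Int)
    (done : List (Int × Int)) (p : Int × Int) :
    pvLk g parent k (done ++ [p]) =
      pvLk g parent k done ++
        (if pvVal g p ≠ 0 ∧ pvBfind parent (pvIdx g p) = k then [p] else []) := by
  unfold pvLk
  rw [List.filter_append]
  congr 1
  by_cases h : pvVal g p ≠ 0 ∧ pvBfind parent (pvIdx g p) = k
  · rw [if_pos h]
    simp only [List.filter, List.filter_nil]
    rw [show (decide (pvVal g p ≠ 0) && (pvBfind parent (pvIdx g p) == k)) = true by
      simp [h.1, h.2]]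
  · rw [if_neg h]
    simp only [List.filter, List.filter_nil]
    rw [show (decide (pvVal g p ≠ 0) && (pvBfind parent (pvIdx g p) == k)) = false by
      simp only [Bool.and_eq_false_iff, decide_eq_false_iff_not, beq_eq_false_iff_ne, ne_eq,
        not_not]
      tauto]

theorem pvMM_single (p : Int × Int) : pvMM [p] p.1 p.1 p.2 p.2 := by
  refine ⟨⟨⟨p, by simp, rfl⟩, ?_⟩, ⟨⟨p, by simp, rfl⟩, ?_⟩,
    ⟨⟨p, by simp, rfl⟩, ?_⟩, ⟨⟨p, by simp, rfl⟩, ?_⟩⟩ <;>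
    · intro q hq
      rw [List.mem_singleton] at hq
      subst hq
      omega

theorem pvMM_snoc (L : List (Int × Int)) (p : Int × Int) (mr Mr mc Mc : Int)
    (h : pvMM L mr Mr mc Mc) :
    pvMM (L ++ [p]) (min mr p.1) (max Mr p.1) (min mc p.2) (max Mc p.2) := by
  obtain ⟨⟨⟨q1, hq1, e1⟩, b1⟩, ⟨⟨q2, hq2, e2⟩, b2⟩, ⟨⟨q3, hq3, e3⟩, b3⟩, ⟨⟨q4, hq4, e4⟩, b4⟩⟩ := h
  refine ⟨⟨?_, ?_⟩, ⟨?_, ?_⟩, ⟨?_, ?_⟩, ⟨?_, ?_⟩⟩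
  · by_cases hle : mr ≤ p.1
    · exact ⟨q1, by simp [hq1], by omega⟩
    · exact ⟨p, by simp, by omega⟩
  · intro q hq
    rcases List.mem_append.1 hq with hq | hq
    · have := b1 q hq; omega
    · rw [List.mem_singleton] at hq; subst hq; omega
  · by_cases hle : p.1 ≤ Mr
    · exact ⟨q2, by simp [hq2], by omega⟩
    · exact ⟨p, by simp, by omega⟩
  · intro q hq
    rcases List.mem_append.1 hq with hq | hq
    · have := b2 q hq; omega
    · rw [List.mem_singleton] at hq; subst hq; omega
  · by_cases hle : mc ≤ p.2
    · exact ⟨q3, by simp [hq3], by omega⟩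
    · exact ⟨p, by simp, by omega⟩
  · intro q hq
    rcases List.mem_append.1 hq with hq | hq
    · have := b3 q hq; omega
    · rw [List.mem_singleton] at hq; subst hq; omega
  · by_cases hle : p.2 ≤ Mc
    · exact ⟨q4, by simp [hq4], by omega⟩
    · exact ⟨p, by simp, by omega⟩
  · intro q hq
    rcases List.mem_append.1 hq with hq | hq
    · have := b4 q hq; omega
    · rw [List.mem_singleton] at hq; subst hq; omega

theorem pvStat_step (g : List (List Int)) (parent : List Int) (done : List (Int × Int))
    (d : PySem.Dict Int (Int × Int × Int × Int × Int))
    (h : pvStatsOK g parent done d) (r c : Int) :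
    pvStatsOK g parent (done ++ [(r, c)]) (pvBstep2 g parent (pvW g) d r c) := by
  have hstep : pvBstep2 g parent (pvW g) d r c =
      if pvVal g (r, c) ≠ 0 then pvBstat d (pvBfind parent (pvIdx g (r, c))) r c else d := rfl
  rw [hstep]
  by_cases hv : pvVal g (r, c) ≠ 0
  · rw [if_pos hv]
    intro k
    have hLapp := pvLk_append g parent k done (r, c)
    by_cases hk : k = pvBfind parent (pvIdx g (r, c))
    · subst hk
      have hLk : pvLk g parent (pvBfind parent (pvIdx g (r, c))) (done ++ [(r, c)]) =
          pvLk g parent (pvBfind parent (pvIdx g (r, c))) done ++ [(r, c)] := by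
        rw [hLapp, if_pos ⟨hv, rfl⟩]
      cases hm : d.get? (pvBfind parent (pvIdx g (r, c))) with
      | none =>
          have hL0 : pvLk g parent (pvBfind parent (pvIdx g (r, c))) done = [] := by
            have := h (pvBfind parent (pvIdx g (r, c)))
            rw [hm] at this
            exact this
          have hbs : pvBstat d (pvBfind parent (pvIdx g (r, c))) r c =
              d.insert (pvBfind parent (pvIdx g (r, c))) (r, r, c, c, 1) := by
            unfold pvBstat
            rw [hm]
          rw [hbs, PySem.Dict.get?_insert_self, hLk, hL0, List.nil_append]
          exact ⟨by simp, pvMM_single (r, c), by simp⟩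
      | some s =>
          obtain ⟨mr, Mr, mc, Mc, n⟩ := s
          have hold := h (pvBfind parent (pvIdx g (r, c)))
          rw [hm] at hold
          obtain ⟨hne, hmm, hlen⟩ := hold
          have hbs : pvBstat d (pvBfind parent (pvIdx g (r, c))) r c =
              d.insert (pvBfind parent (pvIdx g (r, c)))
                (min mr r, max Mr r, min mc c, max Mc c, n + 1) := by
            unfold pvBstat
            rw [hm]
          rw [hbs, PySem.Dict.get?_insert_self, hLk]
          refine ⟨by simp, pvMM_snoc _ (r, c) mr Mr mc Mc hmm, ?_⟩
          show (n + 1 : Int) =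
            (((pvLk g parent (pvBfind parent (pvIdx g (r, c))) done) ++ [(r, c)]).length : Int)
          have hlen' : n = ((pvLk g parent (pvBfind parent (pvIdx g (r, c))) done).length : Int) :=
            hlen
          simp only [List.length_append, List.length_cons, List.length_nil]
          push_cast
          omega
    · have hLk : pvLk g parent k (done ++ [(r, c)]) = pvLk g parent k done := by
        rw [hLapp, if_neg (fun hcon => hk hcon.2.symm), List.append_nil]
      have hget : (pvBstat d (pvBfind parent (pvIdx g (r, c))) r c).get? k = d.get? k := by
        unfold pvBstat
        cases hm : d.get? (pvBfind parent (pvIdx g (r, c))) with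
        | none => exact PySem.Dict.get?_insert_of_ne _ _ hk
        | some s =>
            obtain ⟨mr, Mr, mc, Mc, n⟩ := s
            exact PySem.Dict.get?_insert_of_ne _ _ hk
      have hold := h k
      rw [← hget] at hold
      rw [hLk]
      exact hold
  · rw [if_neg hv]
    intro k
    have hLk : pvLk g parent k (done ++ [(r, c)]) = pvLk g parent k done := by
      rw [pvLk_append, if_neg (fun hcon => hv hcon.1), List.append_nil]
    have hold := h k
    rw [hLk]
    exact hold

theorem pvStats_fold (g : List (List Int)) (parent : List Int) :
    ∀ (cells : List (Int × Int)) (done : List (Int × Int))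
      (d : PySem.Dict Int (Int × Int × Int × Int × Int)),
      pvStatsOK g parent done d →
      pvStatsOK g parent (done ++ cells)
        (cells.foldl (fun d (p : Int × Int) => pvBstep2 g parent (pvW g) d p.1 p.2) d) := by
  intro cells
  induction cells with
  | nil =>
      intro done d h
      simpa using h
  | cons p rest ih =>
      intro done d h
      obtain ⟨a, b⟩ := p
      rw [List.foldl_cons]
      have h1 := pvStat_step g parent done d h a b
      have h2 := ih (done ++ [(a, b)]) _ h1
      have heq3 : done ++ (a, b) :: rest = (done ++ [(a, b)]) ++ rest := by simp
      rw [heq3]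
      exact h2

-- ---------- Stage 8: B side — the clearing passes, pointwise ----------

-- the condition under which B's third pass zeroes a cell holding value v
def pvCondB (parent : List Int) (stats : PySem.Dict Int (Int × Int × Int × Int × Int))
    (w r c v : Int) : Prop :=
  v ≠ 0 ∧ match stats.get? (pvBfind parent (r * w + c)) with
    | some (mr, Mr, mc, Mc, n) =>
        n = (Mr - mr + 1) * (Mc - mc + 1) ∧ mr < r ∧ r < Mr ∧ mc < c ∧ c < Mc
    | none => False

theorem pvBclear_cases (parent : List Int) (stats : PySem.Dict Int (Int × Int × Int × Int × Int))
    (w r : Int) (row : List Int) (c : Int) :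
    (pvCondB parent stats w r c (row.getD c.toNat 0) →
      pvBclear parent stats w r row c = row.set c.toNat 0) ∧
    (¬ pvCondB parent stats w r c (row.getD c.toNat 0) →
      pvBclear parent stats w r row c = row) := by
  unfold pvBclear pvCondB
  cases hm : stats.get? (pvBfind parent (r * w + c)) with
  | none =>
      constructor
      · rintro ⟨_, hf⟩
        exact hf.elim
      · intro _
        by_cases hv : row.getD c.toNat 0 ≠ 0
        · rw [if_pos hv]
        · rw [if_neg hv]
  | some s =>
      obtain ⟨mr, Mr, mc, Mc, n⟩ := s
      constructor
      · rintro ⟨hv, hcond⟩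
        have hcond' : n = (Mr - mr + 1) * (Mc - mc + 1) ∧ mr < r ∧ r < Mr ∧ mc < c ∧ c < Mc :=
          hcond
        rw [if_pos hv]
        show (if n = (Mr - mr + 1) * (Mc - mc + 1) ∧ mr < r ∧ r < Mr ∧ mc < c ∧ c < Mc then
            row.set c.toNat 0 else row) = row.set c.toNat 0
        rw [if_pos hcond']
      · intro hn
        by_cases hv : row.getD c.toNat 0 ≠ 0
        · rw [if_pos hv]
          show (if n = (Mr - mr + 1) * (Mc - mc + 1) ∧ mr < r ∧ r < Mr ∧ mc < c ∧ c < Mc then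
              row.set c.toNat 0 else row) = row
          rw [if_neg (fun hc => hn ⟨hv, hc⟩)]
        · rw [if_neg hv]

theorem pvBclear_length (parent : List Int) (stats : PySem.Dict Int (Int × Int × Int × Int × Int))
    (w r : Int) (row : List Int) (c : Int) :
    (pvBclear parent stats w r row c).length = row.length := by
  rcases pvBclear_cases parent stats w r row c with ⟨h1, h2⟩
  by_cases hC : pvCondB parent stats w r c (row.getD c.toNat 0)
  · rw [h1 hC, List.length_set]
  · rw [h2 hC]

theorem pvClear_fold (parent : List Int) (stats : PySem.Dict Int (Int × Int × Int × Int × Int))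
    (w r : Int) :
    ∀ (cols : List Int), cols.Nodup → (∀ c ∈ cols, 0 ≤ c) →
    ∀ (row : List Int),
      (cols.foldl (pvBclear parent stats w r) row).length = row.length ∧
      ∀ j : ℕ,
        (((j : Int) ∈ cols ∧ pvCondB parent stats w r (j : Int) (row.getD j 0)) →
          (cols.foldl (pvBclear parent stats w r) row).getD j 0 = 0) ∧
        (¬((j : Int) ∈ cols ∧ pvCondB parent stats w r (j : Int) (row.getD j 0)) →
          (cols.foldl (pvBclear parent stats w r) row).getD j 0 = row.getD j 0) := by
  intro cols
  induction cols with
  | nil =>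
      intro _ _ row
      refine ⟨rfl, fun j => ⟨?_, fun _ => rfl⟩⟩
      rintro ⟨hj, _⟩
      exact absurd hj (List.not_mem_nil)
  | cons c rest ih =>
      intro hnd h0 row
      have hc0 : 0 ≤ c := h0 c (by simp)
      rw [List.nodup_cons] at hnd
      obtain ⟨hcr, hrnd⟩ := hnd
      rcases pvBclear_cases parent stats w r row c with ⟨hset, hkeep⟩
      have hlen1 : (pvBclear parent stats w r row c).length = row.length :=
        pvBclear_length parent stats w r row c
      have hother : ∀ j : ℕ, (j : Int) ≠ c →
          (pvBclear parent stats w r row c).getD j 0 = row.getD j 0 := by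
        intro j hj
        by_cases hC : pvCondB parent stats w r c (row.getD c.toNat 0)
        · rw [hset hC, pvGetD_set, if_neg]
          rintro ⟨hje, _⟩
          apply hj
          omega
        · rw [hkeep hC]
      have hat : pvCondB parent stats w r c (row.getD c.toNat 0) →
          (pvBclear parent stats w r row c).getD c.toNat 0 = 0 := by
        intro hC
        have hvne : row.getD c.toNat 0 ≠ 0 := hC.1
        have hinr : c.toNat < row.length := by
          by_contra hge
          exact hvne (List.getD_eq_default _ _ (by omega))
        rw [hset hC, pvGetD_set, if_pos ⟨rfl, hinr⟩]
      obtain ⟨hlen2, hcell2⟩ := ih hrnd (fun c' hc' => h0 c' (List.mem_cons_of_mem c hc'))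
        (pvBclear parent stats w r row c)
      rw [List.foldl_cons]
      refine ⟨hlen2.trans hlen1, fun j => ⟨?_, ?_⟩⟩
      · rintro ⟨hj, hCj⟩
        rcases List.mem_cons.1 hj with hjc | hjr
        · -- j is this column
          have hjn : j = c.toNat := by omega
          have hnotrest : ¬(((j : Int) ∈ rest) ∧
              pvCondB parent stats w r (j : Int)
                ((pvBclear parent stats w r row c).getD j 0)) := by
            rintro ⟨hjm, _⟩
            rw [hjc] at hjm
            exact hcr hjm
          rw [(hcell2 j).2 hnotrest, hjn]
          apply hat
          rw [hjc] at hCj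
          rw [hjn] at hCj
          exact hCj
        · -- j comes later
          have hjnc : (j : Int) ≠ c := by
            intro hje
            rw [← hje] at hcr
            exact hcr hjr
          have hrw := hother j hjnc
          apply (hcell2 j).1
          rw [hrw]
          exact ⟨hjr, hCj⟩
      · intro hno
        by_cases hjc : (j : Int) = c
        · -- this column, condition fails
          have hjn : j = c.toNat := by omega
          have hnC : ¬ pvCondB parent stats w r c (row.getD c.toNat 0) := by
            intro hC
            apply hno
            refine ⟨by rw [hjc]; exact List.mem_cons_self, ?_⟩
            rw [hjc, hjn]
            exact hC
          have hnotrest : ¬(((j : Int) ∈ rest) ∧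
              pvCondB parent stats w r (j : Int)
                ((pvBclear parent stats w r row c).getD j 0)) := by
            rintro ⟨hjm, _⟩
            rw [hjc] at hjm
            exact hcr hjm
          rw [(hcell2 j).2 hnotrest, hkeep hnC]
        · have hrw := hother j hjc
          have hnotrest : ¬(((j : Int) ∈ rest) ∧
              pvCondB parent stats w r (j : Int)
                ((pvBclear parent stats w r row c).getD j 0)) := by
            rintro ⟨hjm, hCj⟩
            rw [hrw] at hCj
            exact hno ⟨List.mem_cons_of_mem c hjm, hCj⟩
          rw [(hcell2 j).2 hnotrest, hrw]

theorem pvClear_nil (parent : List Int) (stats : PySem.Dict Int (Int × Int × Int × Int × Int))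
    (w r : Int) : ∀ cols : List Int, cols.foldl (pvBclear parent stats w r) [] = [] := by
  intro cols
  induction cols with
  | nil => rfl
  | cons c rest ih =>
      rw [List.foldl_cons]
      have h0 : pvBclear parent stats w r [] c = [] := by
        rcases pvBclear_cases parent stats w r [] c with ⟨_, h2⟩
        apply h2
        rintro ⟨hv, _⟩
        exact hv rfl
      rw [h0, ih]

theorem pvRows_fold (parent : List Int) (stats : PySem.Dict Int (Int × Int × Int × Int × Int))
    (w : Int) :
    ∀ (rows : List Int), rows.Nodup → (∀ r ∈ rows, 0 ≤ r) →
    ∀ (G : List (List Int)),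
      (rows.foldl (fun G r => pvBrow parent stats w G r) G).length = G.length ∧
      ∀ i : ℕ,
        (rows.foldl (fun G r => pvBrow parent stats w G r) G).getD i [] =
          if (i : Int) ∈ rows then
            (PySem.List.pyRange 0 w 1).foldl (pvBclear parent stats w (i : Int)) (G.getD i [])
          else G.getD i [] := by
  intro rows
  induction rows with
  | nil =>
      intro _ _ G
      exact ⟨rfl, fun i => by simp⟩
  | cons r rest ih =>
      intro hnd h0 G
      have hr0 : 0 ≤ r := h0 r (by simp)
      rw [List.nodup_cons] at hnd
      obtain ⟨hrr, hrnd⟩ := hnd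
      have hG1len : (pvBrow parent stats w G r).length = G.length := by
        unfold pvBrow
        rw [List.length_set]
      have hG1get : ∀ i : ℕ,
          (pvBrow parent stats w G r).getD i [] =
            if (i : Int) = r then
              (PySem.List.pyRange 0 w 1).foldl (pvBclear parent stats w (i : Int)) (G.getD i [])
            else G.getD i [] := by
        intro i
        unfold pvBrow
        rw [pvGetD_set]
        by_cases hie : (i : Int) = r
        · have hin : i = r.toNat := by omega
          rw [if_pos hie]
          by_cases hlt : r.toNat < G.length
          · rw [if_pos ⟨hin, hlt⟩, hin, Int.toNat_of_nonneg hr0]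
          · rw [if_neg (fun hh => hlt hh.2)]
            have hout : G.getD i [] = [] := List.getD_eq_default _ _ (by omega)
            rw [hout, pvClear_nil]
        · rw [if_neg (by rintro ⟨hh, _⟩; exact hie (by omega)), if_neg hie]
      obtain ⟨hlen2, hget2⟩ := ih hrnd (fun r' hr' => h0 r' (List.mem_cons_of_mem r hr'))
        (pvBrow parent stats w G r)
      rw [List.foldl_cons]
      refine ⟨hlen2.trans hG1len, fun i => ?_⟩
      rw [hget2 i]
      by_cases hie : (i : Int) = r
      · have hnr : (i : Int) ∉ rest := by rw [hie]; exact hrr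
        rw [if_neg hnr, hG1get i, if_pos hie,
          if_pos (by rw [hie]; exact List.mem_cons_self)]
      · have hG1eq : (pvBrow parent stats w G r).getD i [] = G.getD i [] := by
          rw [hG1get i, if_neg hie]
        by_cases hmem : (i : Int) ∈ rest
        · rw [if_pos hmem, if_pos (List.mem_cons_of_mem r hmem), hG1eq]
        · rw [if_neg hmem, hG1eq,
            if_neg (by rintro hm; rcases List.mem_cons.1 hm with hm | hm; exact hie hm; exact hmem hm)]

theorem pvCondB_iff_Z (g : List (List Int)) (parent : List Int)
    (hufP : pvUF g parent (pvEdone g (pvCells g)))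
    (stats : PySem.Dict Int (Int × Int × Int × Int × Int))
    (hstats : pvStatsOK g parent (pvCells g) stats)
    (r c : Int) (hr : 0 ≤ r ∧ r < pvH g) (hc : 0 ≤ c ∧ c < pvW g) :
    pvCondB parent stats (pvW g) r c (pvVal g (r, c)) ↔ pvZ g (r, c) := by
  have hinb : pvInb g (r, c) := ⟨hr.1, hr.2, hc.1, hc.2⟩
  by_cases hv : pvVal g (r, c) = 0
  · constructor
    · rintro ⟨hne, _⟩
      exact absurd hv hne
    · intro hz
      exact absurd hv (pvZ_inb g (r, c) hz).2
  · obtain ⟨hic, hmemx⟩ := pvLk_isComp g parent hufP (r, c) hinb hv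
    have hidx : pvBfind parent (r * pvW g + c) = pvBfind parent (pvIdx g (r, c)) := rfl
    have hst := hstats (pvBfind parent (pvIdx g (r, c)))
    cases hm : stats.get? (pvBfind parent (pvIdx g (r, c))) with
    | none =>
        rw [hm] at hst
        exact absurd hst (List.ne_nil_of_mem hmemx)
    | some s =>
        obtain ⟨mr, Mr, mc, Mc, n⟩ := s
        rw [hm] at hst
        obtain ⟨_, hmm, hlen⟩ := hst
        have hlen' : n =
            ((pvLk g parent (pvBfind parent (pvIdx g (r, c))) (pvCells g)).length : Int) := hlen
        have hZiff := pvComp_Z_iff g (r, c) _ hic mr Mr mc Mc hmm (r, c) hmemx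
        have hcond : pvCondB parent stats (pvW g) r c (pvVal g (r, c)) ↔
            (n = (Mr - mr + 1) * (Mc - mc + 1) ∧ mr < r ∧ r < Mr ∧ mc < c ∧ c < Mc) := by
          unfold pvCondB
          rw [hidx, hm]
          constructor
          · rintro ⟨_, h⟩; exact h
          · intro h; exact ⟨hv, h⟩
        rw [hcond, hZiff]
        constructor
        · rintro ⟨h1, h2⟩
          exact ⟨by omega, h2⟩
        · rintro ⟨h1, h2⟩
          exact ⟨by omega, h2⟩

theorem pvB_descr (g : List (List Int)) (hpre : Pre_transform g) :
    pvDescr g (transform_alt g) := by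
  have hufinit : pvUF g (PySem.List.pyRange 0 (pvH g * pvW g) 1) (pvEdone g []) := by
    obtain ⟨hlen, hok, hterm, hsem⟩ := pvUF_init g
    refine ⟨hlen, hok, hterm, fun i j hi0 hi1 hj0 hj1 => ?_⟩
    rw [hsem i j hi0 hi1 hj0 hj1]
    apply pvEqvGen_congr
    intro x y
    constructor
    · exact False.elim
    · rintro ⟨p, hp, _⟩
      exact absurd hp (List.not_mem_nil)
  have hufP := pvBfold_UF g (pvCells g) (fun p hp => (pvMem_cells g p).1 hp) []
    (PySem.List.pyRange 0 (pvH g * pvW g) 1) hufinit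
  rw [List.nil_append] at hufP
  set P := (pvCells g).foldl (fun P (p : Int × Int) => pvBlink g (pvH g) (pvW g) P p.1 p.2)
    (PySem.List.pyRange 0 (pvH g * pvW g) 1) with hP
  have hstats := pvStats_fold g P (pvCells g) []
    (PySem.Dict.empty : PySem.Dict Int (Int × Int × Int × Int × Int))
    (by
      intro k
      rw [PySem.Dict.get?_empty]
      rfl)
  rw [List.nil_append] at hstats
  set S := (pvCells g).foldl (fun d (p : Int × Int) => pvBstep2 g P (pvW g) d p.1 p.2)
    (PySem.Dict.empty : PySem.Dict Int (Int × Int × Int × Int × Int)) with hS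
  have htr : transform_alt g =
      (PySem.List.pyRange 0 (pvH g) 1).foldl (fun G r => pvBrow P S (pvW g) G r) g := by
    unfold transform_alt
    simp only [pvWif]
    rw [pvNest_foldl, pvNest_foldl, hP, hS]
    rfl
  obtain ⟨hlenF, hgetF⟩ := pvRows_fold P S (pvW g) (PySem.List.pyRange 0 (pvH g) 1)
    (PySem.List.nodup_pyRange_one 0 (pvH g))
    (fun r hr => ((PySem.List.mem_pyRange_one).1 hr).1) g
  rw [htr]
  have hrowlen : ∀ r : ℕ,
      (((PySem.List.pyRange 0 (pvH g) 1).foldl (fun G r => pvBrow P S (pvW g) G r) g).getD r []).length =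
        (g.getD r []).length := by
    intro r
    rw [hgetF r]
    by_cases hmem : (r : Int) ∈ PySem.List.pyRange 0 (pvH g) 1
    · rw [if_pos hmem]
      exact (pvClear_fold P S (pvW g) (r : Int) (PySem.List.pyRange 0 (pvW g) 1)
        (PySem.List.nodup_pyRange_one 0 (pvW g))
        (fun c hc => ((PySem.List.mem_pyRange_one).1 hc).1) (g.getD r [])).1
    · rw [if_neg hmem]
  refine ⟨hlenF, hrowlen, ?_⟩
  intro r c
  have hval : (g.getD r []).getD c 0 = pvVal g ((r : Int), (c : Int)) := by
    show (g.getD r []).getD c 0 = (g.getD ((r : Int)).toNat []).getD ((c : Int)).toNat 0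
    rw [Int.toNat_natCast, Int.toNat_natCast]
  constructor
  · intro hz
    obtain ⟨hinbz, _⟩ := pvZ_inb g _ hz
    obtain ⟨hr0, hr1, hc0, hc1⟩ := hinbz
    have hrmem : (r : Int) ∈ PySem.List.pyRange 0 (pvH g) 1 := by
      rw [PySem.List.mem_pyRange_one]; exact ⟨hr0, hr1⟩
    have hcmem : (c : Int) ∈ PySem.List.pyRange 0 (pvW g) 1 := by
      rw [PySem.List.mem_pyRange_one]; exact ⟨hc0, hc1⟩
    rw [hgetF r, if_pos hrmem]
    apply ((pvClear_fold P S (pvW g) (r : Int) (PySem.List.pyRange 0 (pvW g) 1)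
      (PySem.List.nodup_pyRange_one 0 (pvW g))
      (fun c' hc' => ((PySem.List.mem_pyRange_one).1 hc').1) (g.getD r [])).2 c).1
    refine ⟨hcmem, ?_⟩
    rw [hval]
    exact (pvCondB_iff_Z g P hufP S hstats (r : Int) (c : Int) ⟨hr0, hr1⟩ ⟨hc0, hc1⟩).2 hz
  · intro hz
    rw [hgetF r]
    by_cases hrmem : (r : Int) ∈ PySem.List.pyRange 0 (pvH g) 1
    · rw [if_pos hrmem]
      apply ((pvClear_fold P S (pvW g) (r : Int) (PySem.List.pyRange 0 (pvW g) 1)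
        (PySem.List.nodup_pyRange_one 0 (pvW g))
        (fun c' hc' => ((PySem.List.mem_pyRange_one).1 hc').1) (g.getD r [])).2 c).2
      rintro ⟨hcmem, hcond⟩
      apply hz
      rw [PySem.List.mem_pyRange_one] at hrmem hcmem
      rw [hval] at hcond
      exact (pvCondB_iff_Z g P hufP S hstats (r : Int) (c : Int) hrmem hcmem).1 hcond
    · rw [if_neg hrmem]

-- ===== VERDICT (by name: the statement is the Claim_ definition above) =====
theorem transform_spec : Claim_equal_transform := by
  unfold Claim_equal_transform
  intro g _ hpre
  unfold Spec_transform
  exact pvDescr_unique g _ _ (pvA_descr g hpre) (pvB_descr g hpre)
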